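-- pv_equiv track=rewrite | github.com/juwkim/boj | 백준/Silver/12072. Albocede DNA （Small）/Albocede DNA （Small）.py | solve
-- ===== SOURCE A (Python) =====
-- MOD = int(1e9 + 7)
--
-- def solve(s):
--     n = len(s)
--     dp = [[[[0 for _ in range(4)] for _ in range(n//2 + 2)] for _ in range(n//2 + 2)] for _ in range(n + 1)]
--     dp[0][0][0][0] = 1
--
--     for i in range(n):
--         for j in range(n // 2 + 1):
--             for k in range(n // 2 + 1):
--                 if sum(dp[i][j][k]) == 0:
--                     continue
--                 # situation 0
--                 dp[i + 1][j][k][0] = (dp[i + 1][j][k][0] + dp[i][j][k][0]) % MOD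
--                 if s[i] == 'a':
--                     dp[i + 1][j + 1][k][0] = (dp[i + 1][j + 1][k][0] + dp[i][j][k][0]) % MOD
--                 elif s[i] == 'b' and j > 0:
--                     dp[i + 1][j][k + 1][1] = (dp[i + 1][j][k + 1][1] + dp[i][j][k][0]) % MOD
--
--                 # situation 1
--                 dp[i + 1][j][k][1] = (dp[i + 1][j][k][1] + dp[i][j][k][1]) % MOD
--                 if s[i] == 'b':
--                     dp[i + 1][j][k + 1][1] = (dp[i + 1][j][k + 1][1] + dp[i][j][k][1]) % MOD
--                 elif s[i] == 'c':
--                     if j == 1: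
--                         dp[i + 1][0][k][3] = (dp[i + 1][0][k][3] + dp[i][j][k][1]) % MOD
--                     else:
--                         dp[i + 1][j - 1][k][2] = (dp[i + 1][j - 1][k][2] + dp[i][j][k][1]) % MOD
--
--                 # situation 2
--                 dp[i + 1][j][k][2] = (dp[i + 1][j][k][2] + dp[i][j][k][2]) % MOD
--                 if s[i] == 'c':
--                     if j == 1:
--                         dp[i + 1][0][k][3] = (dp[i + 1][0][k][3] + dp[i][j][k][2]) % MOD
--                     else:
--                         dp[i + 1][j - 1][k][2] = (dp[i + 1][j - 1][k][2] + dp[i][j][k][2]) % MOD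
--
--                 # situation 3
--                 dp[i + 1][j][k][3] = (dp[i + 1][j][k][3] + dp[i][j][k][3]) % MOD
--                 if s[i] == 'd':
--                     if k == 1:
--                         dp[i + 1][0][0][0] = (dp[i + 1][0][0][0] + dp[i][j][k][3]) % MOD
--                     else:
--                         dp[i + 1][0][k - 1][3] = (dp[i + 1][0][k - 1][3] + dp[i][j][k][3]) % MOD
--
--     return (dp[n][0][0][0] - 1) % MOD
-- ===== SOURCE B (Python) =====
-- MOD = int(1e9 + 7)
--
-- def solve(s):
--     # Top-down, demand-driven count: f(i, j, k, st) = number of ways to pick a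
--     # subsequence of s[i:] that drives the block automaton from state (j, k, st)
--     # to acceptance (j = k = 0, phase 0) at the end of the string.  Memoized via
--     # an explicit DFS stack (no recursion-depth limit); only states reachable
--     # from (0, 0, 0, 0) are ever computed.
--     n = len(s)
--     memo = {}
--
--     def succ(i, j, k, st):
--         # successors of state (j, k, st) at position i: skip s[i], plus the one
--         # possible "take" transition of the automaton
--         c = s[i]
--         res = [(i + 1, j, k, st)]
--         if st == 0:
--             if c == 'a':
--                 res.append((i + 1, j + 1, k, 0))
--             elif c == 'b' and j > 0:
--                 res.append((i + 1, j, k + 1, 1))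
--         elif st == 1:
--             if c == 'b':
--                 res.append((i + 1, j, k + 1, 1))
--             elif c == 'c':
--                 res.append((i + 1, 0, k, 3) if j == 1 else (i + 1, j - 1, k, 2))
--         elif st == 2:
--             if c == 'c':
--                 res.append((i + 1, 0, k, 3) if j == 1 else (i + 1, j - 1, k, 2))
--         else:
--             if c == 'd':
--                 res.append((i + 1, 0, 0, 0) if k == 1 else (i + 1, 0, k - 1, 3))
--         return res
--
--     def f(i, j, k, st):
--         stack = [(i, j, k, st)]
--         while stack:
--             node = stack[-1]
--             if node in memo:
--                 stack.pop()
--                 continue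
--             ni, nj, nk, nst = node
--             if ni == n:
--                 memo[node] = 1 if (nj, nk, nst) == (0, 0, 0) else 0
--                 stack.pop()
--                 continue
--             children = succ(ni, nj, nk, nst)
--             pending = [ch for ch in children if ch not in memo]
--             if pending:
--                 stack.extend(pending)
--             else:
--                 memo[node] = sum(memo[ch] for ch in children) % MOD
--                 stack.pop()
--         return memo[(i, j, k, st)]
--
--     return (f(0, 0, 0, 0) - 1) % MOD
-- ===== Notes on version B (the rewrite author's own statement) =====
-- stated objective: alternative
-- what changed: B replaces A's bottom-up scatter into a preallocated 4-dimensional (n+1)x(m+2)x(m+2)x4 table by a top-down demand-driven recursion f(i,j,k,state) = number of completions of the block automaton over the suffix s[i:], memoized in a dict via an explicit DFS stack, so only states reachable from (0,0,0,0) are computed and the answer is (f(0,0,0,0)-1) mod 1e9+7.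
import Mathlib
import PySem

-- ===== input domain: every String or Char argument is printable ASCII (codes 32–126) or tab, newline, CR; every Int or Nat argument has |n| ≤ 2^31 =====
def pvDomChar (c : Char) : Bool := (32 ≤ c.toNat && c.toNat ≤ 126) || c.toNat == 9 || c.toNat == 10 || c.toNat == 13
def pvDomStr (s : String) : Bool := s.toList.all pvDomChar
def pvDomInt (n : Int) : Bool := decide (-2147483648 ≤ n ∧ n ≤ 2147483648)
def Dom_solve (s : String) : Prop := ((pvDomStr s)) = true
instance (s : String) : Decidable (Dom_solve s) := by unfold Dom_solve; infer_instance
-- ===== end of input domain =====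

-- B replaces A's bottom-up scatter into a 4-dimensional table by a top-down
-- demand-driven memoized recursion over suffixes (objective: alternative).

-- ===== PORT A =====
-- MOD = int(1e9 + 7)
def M1 : Int := 1000000007

-- dp[i]  (Python list indexing)
def aGet3 (dp : List (List (List (List Int)))) (i : Int) : List (List (List Int)) :=
  PySem.List.pyGetD dp i []

-- dp[i][j][k]
def aCell (dp : List (List (List (List Int)))) (i j k : Int) : List Int :=
  PySem.List.pyGetD (PySem.List.pyGetD (aGet3 dp i) j []) k []

-- dp[i][j][k][t]
def aGet (dp : List (List (List (List Int)))) (i j k t : Int) : Int :=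
  PySem.List.pyGetD (aCell dp i j k) t 0

-- dp[i][j][k][t] = v  (each level re-indexed exactly as Python's chained subscripts;
-- a negative index wraps, as in Python)
def aSet (dp : List (List (List (List Int)))) (i j k t : Int) (v : Int) :
    List (List (List (List Int))) :=
  PySem.List.pySetD dp i
    (PySem.List.pySetD (aGet3 dp i) j
      (PySem.List.pySetD (PySem.List.pyGetD (aGet3 dp i) j []) k
        (PySem.List.pySetD (aCell dp i j k) t v)))

-- dp[i][j][k][t] = (dp[i][j][k][t] + v) % MOD
def aBump (dp : List (List (List (List Int)))) (i j k t v : Int) :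
    List (List (List (List Int))) :=
  aSet dp i j k t (PySem.Int.mod (aGet dp i j k t + v) M1)

-- the '# situation 0' block of A's loop body
def sit0 (c : Option Char) (i j k : Int) (dp : List (List (List (List Int)))) :
    List (List (List (List Int))) :=
  let dp := aBump dp (i+1) j k 0 (aGet dp i j k 0)
  if c = some 'a' then aBump dp (i+1) (j+1) k 0 (aGet dp i j k 0)
  else if c = some 'b' ∧ j > 0 then aBump dp (i+1) j (k+1) 1 (aGet dp i j k 0)
  else dp

-- the '# situation 1' block
def sit1 (c : Option Char) (i j k : Int) (dp : List (List (List (List Int)))) :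
    List (List (List (List Int))) :=
  let dp := aBump dp (i+1) j k 1 (aGet dp i j k 1)
  if c = some 'b' then aBump dp (i+1) j (k+1) 1 (aGet dp i j k 1)
  else if c = some 'c' then
    (if j = 1 then aBump dp (i+1) 0 k 3 (aGet dp i j k 1)
     else aBump dp (i+1) (j-1) k 2 (aGet dp i j k 1))
  else dp

-- the '# situation 2' block
def sit2 (c : Option Char) (i j k : Int) (dp : List (List (List (List Int)))) :
    List (List (List (List Int))) :=
  let dp := aBump dp (i+1) j k 2 (aGet dp i j k 2)
  if c = some 'c' then
    (if j = 1 then aBump dp (i+1) 0 k 3 (aGet dp i j k 2)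
     else aBump dp (i+1) (j-1) k 2 (aGet dp i j k 2))
  else dp

-- the '# situation 3' block
def sit3 (c : Option Char) (i j k : Int) (dp : List (List (List (List Int)))) :
    List (List (List (List Int))) :=
  let dp := aBump dp (i+1) j k 3 (aGet dp i j k 3)
  if c = some 'd' then
    (if k = 1 then aBump dp (i+1) 0 0 0 (aGet dp i j k 3)
     else aBump dp (i+1) 0 (k-1) 3 (aGet dp i j k 3))
  else dp

-- one (i, j, k) iteration of A's nested loops
def aBody (s : String) (i : Int) (dp : List (List (List (List Int)))) (j k : Int) :
    List (List (List (List Int))) :=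
  if (aCell dp i j k).sum = 0 then dp
  else
    let c := PySem.Str.pyGet? s i
    sit3 c i j k (sit2 c i j k (sit1 c i j k (sit0 c i j k dp)))

def solve (s : String) : Int :=
  let n := PySem.Str.len s
  let dp0 : List (List (List (List Int))) :=
    (PySem.List.pyRange 0 (n+1) 1).map (fun _ =>
      (PySem.List.pyRange 0 (PySem.Int.floordiv n 2 + 2) 1).map (fun _ =>
        (PySem.List.pyRange 0 (PySem.Int.floordiv n 2 + 2) 1).map (fun _ =>
          (PySem.List.pyRange 0 4 1).map (fun _ => (0 : Int)))))
  let dp1 := aSet dp0 0 0 0 0 1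
  let dpn := (PySem.List.pyRange 0 n 1).foldl (fun dp i =>
      (PySem.List.pyRange 0 (PySem.Int.floordiv n 2 + 1) 1).foldl (fun dp j =>
        (PySem.List.pyRange 0 (PySem.Int.floordiv n 2 + 1) 1).foldl (fun dp k =>
          aBody s i dp j k) dp) dp) dp1
  PySem.Int.mod (aGet dpn n 0 0 0 - 1) M1

-- ===== PORT B =====
-- fB cs j k st = Source B's f(i, j, k, st) (cs = the suffix s[i:]): the number of
-- subsequences of cs driving the automaton from (j, k, st) to acceptance.
-- Source B's explicit-stack dict memoisation caches exactly this recursion; it is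
-- ported as the structural recursion it computes (value-identical).
def fB : List Char → Int → Int → Int → Int
  | [], j, k, st => if j = 0 ∧ k = 0 ∧ st = 0 then 1 else 0
  | c :: cs, j, k, st =>
      PySem.Int.mod
        (fB cs j k st +
          (if st = 0 then
            (if c = 'a' then fB cs (j+1) k 0
             else if c = 'b' ∧ j > 0 then fB cs j (k+1) 1 else 0)
          else if st = 1 then
            (if c = 'b' then fB cs j (k+1) 1
             else if c = 'c' then (if j = 1 then fB cs 0 k 3 else fB cs (j-1) k 2) else 0)
          else if st = 2 then
            (if c = 'c' then (if j = 1 then fB cs 0 k 3 else fB cs (j-1) k 2) else 0)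
          else
            (if c = 'd' then (if k = 1 then fB cs 0 0 0 else fB cs 0 (k-1) 3) else 0)))
        M1

def solve_alt (s : String) : Int :=
  PySem.Int.mod (fB s.toList 0 0 0 - 1) M1

-- ===== PRECONDITION & SPEC =====
def Spec_solve (s : String) (out : Int) : Prop := out = solve_alt s
instance (s : String) (out : Int) : Decidable (Spec_solve s out) := by unfold Spec_solve; infer_instance

-- ===== CLAIM (what is proved, stated in full; the proofs are below) =====
def Claim_equal_solve : Prop := ∀ (s : String), Dom_solve s → Spec_solve s (solve s)

-- ===== LEMMAS AND PROOFS =====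

def rv (L : Nat) (i : Int) : Nat := if 0 ≤ i then i.toNat else L - (-i).toNat
def ShapeA (dp : List (List (List (List Int)))) (n m : Nat) : Prop :=
  dp.length = n+1 ∧ ∀ r ∈ dp, (r.length = m+2 ∧ ∀ q ∈ r, (q.length = m+2 ∧ ∀ p ∈ q, p.length = 4))

theorem pyGetD_in {α : Type} (xs : List α) (i : Int) (d : α)
    (h1 : -(xs.length : Int) ≤ i) (h2 : i < xs.length) :
    PySem.List.pyGetD xs i d = xs.getD (rv xs.length i) d := by
  simp only [PySem.List.pyGetD, PySem.List.pyGet?, PySem.List.pyIdx?, rv]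
  split <;> simp [h1, h2, List.getD]

theorem pySetD_in {α : Type} (xs : List α) (i : Int) (v : α)
    (h1 : -(xs.length : Int) ≤ i) (h2 : i < xs.length) :
    PySem.List.pySetD xs i v = xs.set (rv xs.length i) v := by
  simp only [PySem.List.pySetD, PySem.List.pySet?, PySem.List.pyIdx?, rv]
  split <;> simp [h1, h2]

theorem getD_set {α : Type} (xs : List α) (a b : Nat) (v d : α) (ha : a < xs.length) :
    (xs.set a v).getD b d = if a = b then v else xs.getD b d := by
  simp only [List.getD, List.getElem?_set]
  split
  · subst_vars; simp [ha]
  · rfl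

theorem mem_getD {α : Type} (xs : List α) (a : Nat) (d : α) (h : a < xs.length) :
    xs.getD a d ∈ xs := by
  rw [List.getD_eq_getElem xs d h]
  exact List.getElem_mem h

theorem rv_lt (L : Nat) (i : Int) (h1 : -(L : Int) ≤ i) (h2 : i < L) : rv L i < L := by
  unfold rv; split <;> omega

-- lengths from the shape
theorem shape_row {dp : List (List (List (List Int)))} {n m : Nat} (hs : ShapeA dp n m)
    (a : Nat) (ha : a < n+1) : (dp.getD a []).length = m+2 :=
  (hs.2 _ (mem_getD dp a [] (by rw [hs.1]; omega))).1

theorem shape_q {dp : List (List (List (List Int)))} {n m : Nat} (hs : ShapeA dp n m)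
    (a b : Nat) (ha : a < n+1) (hb : b < m+2) :
    ((dp.getD a []).getD b []).length = m+2 := by
  have h1 := hs.2 _ (mem_getD dp a [] (by rw [hs.1]; omega))
  exact (h1.2 _ (mem_getD _ b [] (by rw [h1.1]; omega))).1

theorem shape_p {dp : List (List (List (List Int)))} {n m : Nat} (hs : ShapeA dp n m)
    (a b c : Nat) (ha : a < n+1) (hb : b < m+2) (hc : c < m+2) :
    (((dp.getD a []).getD b []).getD c []).length = 4 := by
  have h1 := hs.2 _ (mem_getD dp a [] (by rw [hs.1]; omega))
  have h2 := h1.2 _ (mem_getD _ b [] (by rw [h1.1]; omega))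
  exact h2.2 _ (mem_getD _ c [] (by rw [h2.1]; omega))

theorem aGet_eq {dp : List (List (List (List Int)))} {n m : Nat} (hs : ShapeA dp n m)
    (a b c d : Int) (ha1 : -((n:Int)+1) ≤ a) (ha2 : a < (n:Int)+1)
    (hb1 : -((m:Int)+2) ≤ b) (hb2 : b < (m:Int)+2)
    (hc1 : -((m:Int)+2) ≤ c) (hc2 : c < (m:Int)+2)
    (hd1 : -4 ≤ d) (hd2 : d < 4) :
    aGet dp a b c d =
      (((dp.getD (rv (n+1) a) []).getD (rv (m+2) b) []).getD (rv (m+2) c) []).getD (rv 4 d) 0 := by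
  have hL : dp.length = n+1 := hs.1
  unfold aGet aCell aGet3
  rw [pyGetD_in dp a [] (by omega) (by omega), hL]
  rw [pyGetD_in _ b [] (by rw [shape_row hs _ (rv_lt _ _ (by omega) (by omega))]; push_cast; omega)
        (by rw [shape_row hs _ (rv_lt _ _ (by omega) (by omega))]; push_cast; omega),
      shape_row hs _ (rv_lt _ _ (by omega) (by omega))]
  rw [pyGetD_in _ c []
        (by rw [shape_q hs _ _ (rv_lt _ _ (by omega) (by omega)) (rv_lt _ _ (by omega) (by omega))]; push_cast; omega)
        (by rw [shape_q hs _ _ (rv_lt _ _ (by omega) (by omega)) (rv_lt _ _ (by omega) (by omega))]; push_cast; omega),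
      shape_q hs _ _ (rv_lt _ _ (by omega) (by omega)) (rv_lt _ _ (by omega) (by omega))]
  rw [pyGetD_in _ d 0
        (by rw [shape_p hs _ _ _ (rv_lt _ _ (by omega) (by omega)) (rv_lt _ _ (by omega) (by omega)) (rv_lt _ _ (by omega) (by omega))]; push_cast; omega)
        (by rw [shape_p hs _ _ _ (rv_lt _ _ (by omega) (by omega)) (rv_lt _ _ (by omega) (by omega)) (rv_lt _ _ (by omega) (by omega))]; push_cast; omega),
      shape_p hs _ _ _ (rv_lt _ _ (by omega) (by omega)) (rv_lt _ _ (by omega) (by omega)) (rv_lt _ _ (by omega) (by omega))]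

theorem aSet_eq {dp : List (List (List (List Int)))} {n m : Nat} (hs : ShapeA dp n m)
    (a b c d v : Int) (ha1 : -((n:Int)+1) ≤ a) (ha2 : a < (n:Int)+1)
    (hb1 : -((m:Int)+2) ≤ b) (hb2 : b < (m:Int)+2)
    (hc1 : -((m:Int)+2) ≤ c) (hc2 : c < (m:Int)+2)
    (hd1 : -4 ≤ d) (hd2 : d < 4) :
    aSet dp a b c d v =
      dp.set (rv (n+1) a)
        ((dp.getD (rv (n+1) a) []).set (rv (m+2) b)
          (((dp.getD (rv (n+1) a) []).getD (rv (m+2) b) []).set (rv (m+2) c)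
            ((((dp.getD (rv (n+1) a) []).getD (rv (m+2) b) []).getD (rv (m+2) c) []).set (rv 4 d) v))) := by
  have hL : dp.length = n+1 := hs.1
  have hA : rv (n+1) a < n+1 := rv_lt _ _ (by omega) (by omega)
  have hB : rv (m+2) b < m+2 := rv_lt _ _ (by omega) (by omega)
  have hC : rv (m+2) c < m+2 := rv_lt _ _ (by omega) (by omega)
  have hD : rv 4 d < 4 := rv_lt _ _ (by omega) (by omega)
  have hrow := shape_row hs _ hA
  have hq := shape_q hs _ _ hA hB
  have hp := shape_p hs _ _ _ hA hB hC
  unfold aSet aCell aGet3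
  rw [pyGetD_in dp a [] (by omega) (by omega), hL]
  rw [pyGetD_in _ b [] (by rw [hrow]; push_cast; omega) (by rw [hrow]; push_cast; omega), hrow]
  rw [pyGetD_in _ c [] (by rw [hq]; push_cast; omega) (by rw [hq]; push_cast; omega), hq]
  rw [pySetD_in _ d v (by rw [hp]; push_cast; omega) (by rw [hp]; push_cast; omega), hp]
  rw [pySetD_in _ c _ (by rw [hq]; push_cast; omega) (by rw [hq]; push_cast; omega), hq]
  rw [pySetD_in _ b _ (by rw [hrow]; push_cast; omega) (by rw [hrow]; push_cast; omega), hrow]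
  rw [pySetD_in dp a _ (by omega) (by omega), hL]

theorem rv_nonneg (L : Nat) (i : Int) (h : 0 ≤ i) : rv L i = i.toNat := by
  unfold rv; rw [if_pos h]

theorem aBump_shape {dp : List (List (List (List Int)))} {n m : Nat} (hs : ShapeA dp n m)
    (a b c d v : Int) (ha1 : 0 ≤ a) (ha2 : a < (n:Int)+1)
    (hb1 : -((m:Int)+2) ≤ b) (hb2 : b < (m:Int)+2)
    (hc1 : -((m:Int)+2) ≤ c) (hc2 : c < (m:Int)+2)
    (hd1 : 0 ≤ d) (hd2 : d < 4) :
    ShapeA (aBump dp a b c d v) n m := by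
  have hA : rv (n+1) a < n+1 := rv_lt _ _ (by omega) (by omega)
  have hB : rv (m+2) b < m+2 := rv_lt _ _ (by omega) (by omega)
  have hC : rv (m+2) c < m+2 := rv_lt _ _ (by omega) (by omega)
  have hrow := shape_row hs _ hA
  have hq := shape_q hs _ _ hA hB
  have hp := shape_p hs _ _ _ hA hB hC
  unfold aBump
  rw [aSet_eq hs _ _ _ _ _ (by omega) ha2 hb1 hb2 hc1 hc2 (by omega) hd2]
  constructor
  · rw [List.length_set]; exact hs.1
  · intro r hr
    rcases List.mem_or_eq_of_mem_set hr with h | h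
    · exact hs.2 r h
    · subst h
      constructor
      · rw [List.length_set]; exact hrow
      · intro q hq'
        rcases List.mem_or_eq_of_mem_set hq' with h | h
        · exact (hs.2 _ (mem_getD dp _ [] (by rw [hs.1]; omega))).2 q h
        · subst h
          constructor
          · rw [List.length_set]; exact hq
          · intro p hp'
            rcases List.mem_or_eq_of_mem_set hp' with h | h
            · have h1 := hs.2 _ (mem_getD dp _ [] (by rw [hs.1]; omega))
              exact (h1.2 _ (mem_getD _ _ [] (by rw [h1.1]; omega))).2 p h
            · subst h
              rw [List.length_set]; exact hp

theorem aBump_get {dp : List (List (List (List Int)))} {n m : Nat} (hs : ShapeA dp n m)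
    (a b c d v : Int) (ha1 : 0 ≤ a) (ha2 : a < (n:Int)+1)
    (hb1 : -((m:Int)+2) ≤ b) (hb2 : b < (m:Int)+2)
    (hc1 : -((m:Int)+2) ≤ c) (hc2 : c < (m:Int)+2)
    (hd1 : 0 ≤ d) (hd2 : d < 4)
    (a' b' c' d' : Int) (ha1' : 0 ≤ a') (ha2' : a' < (n:Int)+1)
    (hb1' : 0 ≤ b') (hb2' : b' < (m:Int)+2)
    (hc1' : 0 ≤ c') (hc2' : c' < (m:Int)+2)
    (hd1' : 0 ≤ d') (hd2' : d' < 4) :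
    aGet (aBump dp a b c d v) a' b' c' d' =
      if a = a' ∧ rv (m+2) b = b'.toNat ∧ rv (m+2) c = c'.toNat ∧ d = d' then
        PySem.Int.mod (aGet dp a' b' c' d' + v) M1
      else aGet dp a' b' c' d' := by
  have hs' := aBump_shape hs a b c d v ha1 ha2 hb1 hb2 hc1 hc2 hd1 hd2
  have hA : rv (n+1) a < n+1 := rv_lt _ _ (by omega) (by omega)
  have hB : rv (m+2) b < m+2 := rv_lt _ _ (by omega) (by omega)
  have hC : rv (m+2) c < m+2 := rv_lt _ _ (by omega) (by omega)
  have hrow := shape_row hs _ hA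
  have hq := shape_q hs _ _ hA hB
  have hp := shape_p hs _ _ _ hA hB hC
  rw [aGet_eq hs' a' b' c' d' (by omega) ha2' (by omega) hb2' (by omega) hc2' (by omega) hd2']
  rw [aGet_eq hs a' b' c' d' (by omega) ha2' (by omega) hb2' (by omega) hc2' (by omega) hd2']
  unfold aBump
  rw [aSet_eq hs _ _ _ _ _ (by omega) ha2 hb1 hb2 hc1 hc2 (by omega) hd2]
  rw [getD_set _ _ _ _ _ (by rw [hs.1]; exact hA)]
  by_cases hAe : rv (n+1) a = rv (n+1) a'
  · rw [if_pos hAe, ← hAe]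
    rw [getD_set _ _ _ _ _ (by rw [hrow]; exact hB)]
    by_cases hBe : rv (m+2) b = rv (m+2) b'
    · rw [if_pos hBe, ← hBe]
      rw [getD_set _ _ _ _ _ (by rw [hq]; exact hC)]
      by_cases hCe : rv (m+2) c = rv (m+2) c'
      · rw [if_pos hCe, ← hCe]
        rw [getD_set _ _ _ _ _ (by rw [hp]; exact (rv_lt 4 d (by omega) (by omega)))]
        by_cases hDe : rv 4 d = rv 4 d'
        · rw [if_pos hDe, ← hDe]
          rw [if_pos ?hit]
          case hit =>
            rw [rv_nonneg _ _ ha1'] at hAe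
            rw [rv_nonneg _ _ hb1'] at hBe
            rw [rv_nonneg _ _ hc1'] at hCe
            rw [rv_nonneg _ _ ha1] at hAe
            rw [rv_nonneg _ _ hd1, rv_nonneg _ _ hd1'] at hDe
            refine ⟨by omega, hBe, hCe, by omega⟩
          rw [aGet_eq hs a b c d (by omega) ha2 hb1 hb2 hc1 hc2 (by omega) hd2]
        · rw [if_neg hDe, if_neg ?nohit]
          case nohit =>
            rw [rv_nonneg _ _ hd1, rv_nonneg _ _ hd1'] at hDe
            rintro ⟨-, -, -, h4⟩; exact hDe (by omega)
      · rw [if_neg hCe, if_neg ?nohit]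
        case nohit =>
          rw [rv_nonneg _ _ hc1'] at hCe
          rintro ⟨-, -, h3, -⟩; exact hCe h3
    · rw [if_neg hBe, if_neg ?nohit]
      case nohit =>
        rw [rv_nonneg _ _ hb1'] at hBe
        rintro ⟨-, h2, -, -⟩; exact hBe h2
  · rw [if_neg hAe, if_neg ?nohit]
    case nohit =>
      rw [rv_nonneg _ _ ha1, rv_nonneg _ _ ha1'] at hAe
      rintro ⟨h1, -, -, -⟩; exact hAe (by omega)

def Tr (n m : Nat) (i : Int) (dp0 dp' : List (List (List (List Int))))
    (S : (Int → Int → Int → Int) → Int → Int → Int → Int) : Prop :=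
  ShapeA dp' n m ∧
  (∀ lvl J K t : Int, 0 ≤ lvl → lvl < n+1 → ¬ lvl = i+1 →
      0 ≤ J → J < (m:Int)+2 → 0 ≤ K → K < (m:Int)+2 → 0 ≤ t → t < 4 →
      aGet dp' lvl J K t = aGet dp0 lvl J K t) ∧
  (∀ J K t : Int, 0 ≤ J → J ≤ m → 0 ≤ K → K ≤ m → 0 ≤ t → t < 4 →
      aGet dp' (i+1) J K t =
        PySem.Int.mod (aGet dp0 (i+1) J K t + S (fun a b c => aGet dp0 i a b c) J K t) M1)

theorem M1_pos : (0:Int) < M1 := by norm_num [M1]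

theorem mod_add_mod (x y : Int) :
    PySem.Int.mod (PySem.Int.mod x M1 + y) M1 = PySem.Int.mod (x + y) M1 := by
  rw [PySem.Int.mod_eq_emod_of_pos M1_pos, PySem.Int.mod_eq_emod_of_pos M1_pos,
      PySem.Int.mod_eq_emod_of_pos M1_pos]
  exact Int.emod_add_emod x M1 y

theorem Tr_congr {n m : Nat} {i : Int} {dp0 dp' : List (List (List (List Int)))}
    {S S' : (Int → Int → Int → Int) → Int → Int → Int → Int}
    (h : Tr n m i dp0 dp' S)
    (he : ∀ J K t : Int, 0 ≤ J → J ≤ m → 0 ≤ K → K ≤ m → 0 ≤ t → t < 4 →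
      S (fun a b c => aGet dp0 i a b c) J K t = S' (fun a b c => aGet dp0 i a b c) J K t) :
    Tr n m i dp0 dp' S' := by
  obtain ⟨h1, h2, h3⟩ := h
  refine ⟨h1, h2, fun J K t hJ1 hJ2 hK1 hK2 ht1 ht2 => ?_⟩
  rw [h3 J K t hJ1 hJ2 hK1 hK2 ht1 ht2, he J K t hJ1 hJ2 hK1 hK2 ht1 ht2]

theorem Tr_step {n m : Nat} {i : Int} {dp0 dp' : List (List (List (List Int)))}
    {S : (Int → Int → Int → Int) → Int → Int → Int → Int}
    (h : Tr n m i dp0 dp' S) (hi1 : 0 ≤ i) (hi2 : i < n)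
    (b c d st j k : Int)
    (hb1 : -((m:Int)+2) ≤ b) (hb2 : b < (m:Int)+2)
    (hc1 : -((m:Int)+2) ≤ c) (hc2 : c < (m:Int)+2)
    (hd1 : 0 ≤ d) (hd2 : d < 4)
    (hj1 : 0 ≤ j) (hj2 : j ≤ m) (hk1 : 0 ≤ k) (hk2 : k ≤ m)
    (hst1 : 0 ≤ st) (hst2 : st < 4)
    (H : Int → Int → Int → Prop) [inst : ∀ J K t, Decidable (H J K t)]
    (hH : ∀ J K t : Int, 0 ≤ J → J ≤ m → 0 ≤ K → K ≤ m → 0 ≤ t → t < 4 →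
      (H J K t ↔ (rv (m+2) b = J.toNat ∧ rv (m+2) c = K.toNat ∧ d = t))) :
    Tr n m i dp0 (aBump dp' (i+1) b c d (aGet dp' i j k st))
      (fun f J K t => S f J K t + if H J K t then f j k st else 0) := by
  obtain ⟨hsh, hun, htr⟩ := h
  have hval : aGet dp' i j k st = aGet dp0 i j k st :=
    hun i j k st hi1 (by omega) (by omega) hj1 (by omega) hk1 (by omega) hst1 hst2
  refine ⟨aBump_shape hsh (i+1) b c d _ (by omega) (by omega) hb1 hb2 hc1 hc2 hd1 hd2, ?_, ?_⟩
  · intro lvl J K t h1 h2 h3 h4 h5 h6 h7 h8 h9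
    rw [aBump_get hsh (i+1) b c d _ (by omega) (by omega) hb1 hb2 hc1 hc2 hd1 hd2
          lvl J K t h1 h2 h4 h5 h6 h7 h8 h9]
    rw [if_neg (by rintro ⟨e1, -⟩; exact h3 e1.symm)]
    exact hun lvl J K t h1 h2 h3 h4 h5 h6 h7 h8 h9
  · intro J K t hJ1 hJ2 hK1 hK2 ht1 ht2
    rw [aBump_get hsh (i+1) b c d _ (by omega) (by omega) hb1 hb2 hc1 hc2 hd1 hd2
          (i+1) J K t (by omega) (by omega) hJ1 (by omega) hK1 (by omega) ht1 ht2]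
    rw [hval, htr J K t hJ1 hJ2 hK1 hK2 ht1 ht2]
    beta_reduce
    by_cases hit : (i+1 = i+1 ∧ rv (m+2) b = J.toNat ∧ rv (m+2) c = K.toNat ∧ d = t)
    · rw [if_pos hit, if_pos ((hH J K t hJ1 hJ2 hK1 hK2 ht1 ht2).2 ⟨hit.2.1, hit.2.2.1, hit.2.2.2⟩)]
      rw [mod_add_mod, add_assoc]
    · rw [if_neg hit, if_neg (fun hh => hit ⟨rfl, (hH J K t hJ1 hJ2 hK1 hK2 ht1 ht2).1 hh⟩)]
      rw [add_zero]

theorem Tr_base {n m : Nat} {i : Int} {dp0 : List (List (List (List Int)))}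
    (hsh : ShapeA dp0 n m)
    (hz : ∀ J K t : Int, 0 ≤ J → J ≤ m → 0 ≤ K → K ≤ m → 0 ≤ t → t < 4 →
      PySem.Int.mod (aGet dp0 (i+1) J K t) M1 = aGet dp0 (i+1) J K t) :
    Tr n m i dp0 dp0 (fun _ _ _ _ => 0) := by
  refine ⟨hsh, fun _ _ _ _ _ _ _ _ _ _ _ _ _ => rfl, fun J K t h1 h2 h3 h4 h5 h6 => ?_⟩
  rw [add_zero, hz J K t h1 h2 h3 h4 h5 h6]

theorem sum_four (l : List Int) (h : l.length = 4) :
    l.sum = l.getD 0 0 + l.getD 1 0 + l.getD 2 0 + l.getD 3 0 := by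
  match l, h with
  | [a, b, c, d], _ => simp [List.getD]; ring

theorem cell_sum {dp : List (List (List (List Int)))} {n m : Nat} (hs : ShapeA dp n m)
    (i j k : Int) (hi1 : 0 ≤ i) (hi2 : i < (n:Int)+1)
    (hj1 : 0 ≤ j) (hj2 : j < (m:Int)+2) (hk1 : 0 ≤ k) (hk2 : k < (m:Int)+2) :
    (aCell dp i j k).sum = aGet dp i j k 0 + aGet dp i j k 1 + aGet dp i j k 2 + aGet dp i j k 3 := by
  have hL : dp.length = n+1 := hs.1
  have hA : rv (n+1) i < n+1 := rv_lt _ _ (by omega) (by omega)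
  have hB : rv (m+2) j < m+2 := rv_lt _ _ (by omega) (by omega)
  have hC : rv (m+2) k < m+2 := rv_lt _ _ (by omega) (by omega)
  have hcell : aCell dp i j k = ((dp.getD (rv (n+1) i) []).getD (rv (m+2) j) []).getD (rv (m+2) k) [] := by
    unfold aCell aGet3
    rw [pyGetD_in dp i [] (by omega) (by omega), hs.1]
    rw [pyGetD_in _ j [] (by rw [shape_row hs _ hA]; push_cast; omega)
          (by rw [shape_row hs _ hA]; push_cast; omega), shape_row hs _ hA]
    rw [pyGetD_in _ k [] (by rw [shape_q hs _ _ hA hB]; push_cast; omega)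
          (by rw [shape_q hs _ _ hA hB]; push_cast; omega), shape_q hs _ _ hA hB]
  have hlen : (aCell dp i j k).length = 4 := by rw [hcell]; exact shape_p hs _ _ _ hA hB hC
  rw [sum_four _ hlen]
  rw [aGet_eq hs i j k 0 (by omega) hi2 (by omega) hj2 (by omega) hk2 (by omega) (by omega),
      aGet_eq hs i j k 1 (by omega) hi2 (by omega) hj2 (by omega) hk2 (by omega) (by omega),
      aGet_eq hs i j k 2 (by omega) hi2 (by omega) hj2 (by omega) hk2 (by omega) (by omega),
      aGet_eq hs i j k 3 (by omega) hi2 (by omega) hj2 (by omega) hk2 (by omega) (by omega),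
      hcell]
  rfl

theorem Tr_stay {n m : Nat} {i : Int} {dp0 dp' : List (List (List (List Int)))}
    {S : (Int → Int → Int → Int) → Int → Int → Int → Int}
    (h : Tr n m i dp0 dp' S) (hi1 : 0 ≤ i) (hi2 : i < n)
    (j k st : Int) (hj1 : 0 ≤ j) (hj2 : j ≤ m) (hk1 : 0 ≤ k) (hk2 : k ≤ m)
    (hst1 : 0 ≤ st) (hst2 : st < 4) :
    Tr n m i dp0 (aBump dp' (i+1) j k st (aGet dp' i j k st))
      (fun f J K t => S f J K t + if t = st ∧ J = j ∧ K = k then f j k st else 0) :=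
  Tr_step h hi1 hi2 j k st st j k (by omega) (by omega) (by omega) (by omega) hst1 hst2
    hj1 hj2 hk1 hk2 hst1 hst2 (fun J K t => t = st ∧ J = j ∧ K = k)
    (by intro J K t h1 h2 h3 h4 h5 h6; simp only [rv]; try split_ifs <;> omega)

-- situation 0 block of A's loop body
def contrib0 (c? : Option Char) (f : Int → Int → Int → Int) (j k J K t : Int) : Int :=
    (if t = 0 ∧ J = j ∧ K = k then f j k 0 else 0)
  + (if c? = some 'a' ∧ t = 0 ∧ J = j+1 ∧ K = k then f j k 0 else 0)
  + (if ¬c? = some 'a' ∧ c? = some 'b' ∧ j > 0 ∧ t = 1 ∧ J = j ∧ K = k+1 then f j k 0 else 0)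

def contrib1 (c? : Option Char) (f : Int → Int → Int → Int) (j k J K t : Int) : Int :=
    (if t = 1 ∧ J = j ∧ K = k then f j k 1 else 0)
  + (if c? = some 'b' ∧ t = 1 ∧ J = j ∧ K = k+1 then f j k 1 else 0)
  + (if ¬c? = some 'b' ∧ c? = some 'c' ∧ j = 1 ∧ t = 3 ∧ J = 0 ∧ K = k then f j k 1 else 0)
  + (if ¬c? = some 'b' ∧ c? = some 'c' ∧ ¬j = 1 ∧ 2 ≤ j ∧ t = 2 ∧ J = j-1 ∧ K = k then f j k 1 else 0)

def contrib2 (c? : Option Char) (f : Int → Int → Int → Int) (j k J K t : Int) : Int :=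
    (if t = 2 ∧ J = j ∧ K = k then f j k 2 else 0)
  + (if c? = some 'c' ∧ j = 1 ∧ t = 3 ∧ J = 0 ∧ K = k then f j k 2 else 0)
  + (if c? = some 'c' ∧ ¬j = 1 ∧ 2 ≤ j ∧ t = 2 ∧ J = j-1 ∧ K = k then f j k 2 else 0)

def contrib3 (c? : Option Char) (f : Int → Int → Int → Int) (j k J K t : Int) : Int :=
    (if t = 3 ∧ J = j ∧ K = k then f j k 3 else 0)
  + (if c? = some 'd' ∧ k = 1 ∧ t = 0 ∧ J = 0 ∧ K = 0 then f j k 3 else 0)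
  + (if c? = some 'd' ∧ ¬k = 1 ∧ 2 ≤ k ∧ t = 3 ∧ J = 0 ∧ K = k-1 then f j k 3 else 0)

def contrib (c? : Option Char) (f : Int → Int → Int → Int) (j k J K t : Int) : Int :=
  contrib0 c? f j k J K t + contrib1 c? f j k J K t + contrib2 c? f j k J K t + contrib3 c? f j k J K t

theorem contrib_zero (c? : Option Char) (f : Int → Int → Int → Int) (j k J K t : Int)
    (h0 : ∀ st : Int, 0 ≤ st → st < 4 → f j k st = 0) :
    contrib c? f j k J K t = 0 := by
  have e0 : f j k 0 = 0 := h0 0 (by omega) (by omega)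
  have e1 : f j k 1 = 0 := h0 1 (by omega) (by omega)
  have e2 : f j k 2 = 0 := h0 2 (by omega) (by omega)
  have e3 : f j k 3 = 0 := h0 3 (by omega) (by omega)
  simp [contrib, contrib0, contrib1, contrib2, contrib3, e0, e1, e2, e3]


theorem Tr_sit0 {n m : Nat} {i : Int} {dp0 dp' : List (List (List (List Int)))}
    {S : (Int → Int → Int → Int) → Int → Int → Int → Int} (c? : Option Char)
    (h : Tr n m i dp0 dp' S) (hi1 : 0 ≤ i) (hi2 : i < n)
    (j k : Int) (hj1 : 0 ≤ j) (hj2 : j ≤ m) (hk1 : 0 ≤ k) (hk2 : k ≤ m) :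
    Tr n m i dp0 (sit0 c? i j k dp')
      (fun f J K t => S f J K t + contrib0 c? f j k J K t) := by
  simp only [sit0]
  have h1 := Tr_stay h hi1 hi2 j k 0 hj1 hj2 hk1 hk2 (by omega) (by omega)
  by_cases hca : c? = some 'a'
  · rw [if_pos hca]
    have h2 := Tr_step h1 hi1 hi2 (j+1) k 0 0 j k (by omega) (by omega) (by omega) (by omega)
      (by omega) (by omega) hj1 hj2 hk1 hk2 (by omega) (by omega)
      (fun J K t => t = 0 ∧ J = j+1 ∧ K = k)
      (by intro J K t a1 a2 a3 a4 a5 a6; simp only [rv]; try split_ifs <;> omega)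
    refine Tr_congr h2 ?_
    intro J K t a1 a2 a3 a4 a5 a6
    simp [contrib0, hca]; try split_ifs <;> omega
  · rw [if_neg hca]
    by_cases hcb : c? = some 'b'
    · by_cases hjp : j > 0
      · rw [if_pos ⟨hcb, hjp⟩]
        have h2 := Tr_step h1 hi1 hi2 j (k+1) 1 0 j k (by omega) (by omega) (by omega) (by omega)
          (by omega) (by omega) hj1 hj2 hk1 hk2 (by omega) (by omega)
          (fun J K t => t = 1 ∧ J = j ∧ K = k+1)
          (by intro J K t a1 a2 a3 a4 a5 a6; simp only [rv]; try split_ifs <;> omega)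
        refine Tr_congr h2 ?_
        intro J K t a1 a2 a3 a4 a5 a6
        simp [contrib0, hca, hcb, hjp]; try split_ifs <;> omega
      · rw [if_neg (fun hh => hjp hh.2)]
        refine Tr_congr h1 ?_
        intro J K t a1 a2 a3 a4 a5 a6
        simp [contrib0, hca, hcb, hjp]; try split_ifs <;> omega
    · rw [if_neg (fun hh => hcb hh.1)]
      refine Tr_congr h1 ?_
      intro J K t a1 a2 a3 a4 a5 a6
      simp [contrib0, hca, hcb]; try split_ifs <;> omega

theorem Tr_sit1 {n m : Nat} {i : Int} {dp0 dp' : List (List (List (List Int)))}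
    {S : (Int → Int → Int → Int) → Int → Int → Int → Int} (c? : Option Char)
    (h : Tr n m i dp0 dp' S) (hi1 : 0 ≤ i) (hi2 : i < n)
    (j k : Int) (hj1 : 0 ≤ j) (hj2 : j ≤ m) (hk1 : 0 ≤ k) (hk2 : k ≤ m) :
    Tr n m i dp0 (sit1 c? i j k dp')
      (fun f J K t => S f J K t + contrib1 c? f j k J K t) := by
  simp only [sit1]
  have h1 := Tr_stay h hi1 hi2 j k 1 hj1 hj2 hk1 hk2 (by omega) (by omega)
  by_cases hcb : c? = some 'b'
  · rw [if_pos hcb]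
    have h2 := Tr_step h1 hi1 hi2 j (k+1) 1 1 j k (by omega) (by omega) (by omega) (by omega)
      (by omega) (by omega) hj1 hj2 hk1 hk2 (by omega) (by omega)
      (fun J K t => t = 1 ∧ J = j ∧ K = k+1)
      (by intro J K t a1 a2 a3 a4 a5 a6; simp only [rv]; try split_ifs <;> omega)
    refine Tr_congr h2 ?_
    intro J K t a1 a2 a3 a4 a5 a6
    simp [contrib1, hcb]; try split_ifs <;> omega
  · rw [if_neg hcb]
    by_cases hcc : c? = some 'c'
    · rw [if_pos hcc]
      by_cases hj1e : j = 1
      · rw [if_pos hj1e]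
        have h2 := Tr_step h1 hi1 hi2 0 k 3 1 j k (by omega) (by omega) (by omega) (by omega)
          (by omega) (by omega) hj1 hj2 hk1 hk2 (by omega) (by omega)
          (fun J K t => t = 3 ∧ J = 0 ∧ K = k)
          (by intro J K t a1 a2 a3 a4 a5 a6; simp only [rv]; try split_ifs <;> omega)
        refine Tr_congr h2 ?_
        intro J K t a1 a2 a3 a4 a5 a6
        simp [contrib1, hcb, hcc, hj1e]; try split_ifs <;> omega
      · rw [if_neg hj1e]
        have h2 := Tr_step h1 hi1 hi2 (j-1) k 2 1 j k (by omega) (by omega) (by omega) (by omega)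
          (by omega) (by omega) hj1 hj2 hk1 hk2 (by omega) (by omega)
          (fun J K t => 2 ≤ j ∧ t = 2 ∧ J = j-1 ∧ K = k)
          (by intro J K t a1 a2 a3 a4 a5 a6; simp only [rv]; try split_ifs <;> omega)
        refine Tr_congr h2 ?_
        intro J K t a1 a2 a3 a4 a5 a6
        simp [contrib1, hcb, hcc, hj1e]; try split_ifs <;> omega
    · rw [if_neg hcc]
      refine Tr_congr h1 ?_
      intro J K t a1 a2 a3 a4 a5 a6
      simp [contrib1, hcb, hcc]; try split_ifs <;> omega

theorem Tr_sit2 {n m : Nat} {i : Int} {dp0 dp' : List (List (List (List Int)))}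
    {S : (Int → Int → Int → Int) → Int → Int → Int → Int} (c? : Option Char)
    (h : Tr n m i dp0 dp' S) (hi1 : 0 ≤ i) (hi2 : i < n)
    (j k : Int) (hj1 : 0 ≤ j) (hj2 : j ≤ m) (hk1 : 0 ≤ k) (hk2 : k ≤ m) :
    Tr n m i dp0 (sit2 c? i j k dp')
      (fun f J K t => S f J K t + contrib2 c? f j k J K t) := by
  simp only [sit2]
  have h1 := Tr_stay h hi1 hi2 j k 2 hj1 hj2 hk1 hk2 (by omega) (by omega)
  by_cases hcc : c? = some 'c'
  · rw [if_pos hcc]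
    by_cases hj1e : j = 1
    · rw [if_pos hj1e]
      have h2 := Tr_step h1 hi1 hi2 0 k 3 2 j k (by omega) (by omega) (by omega) (by omega)
        (by omega) (by omega) hj1 hj2 hk1 hk2 (by omega) (by omega)
        (fun J K t => t = 3 ∧ J = 0 ∧ K = k)
        (by intro J K t a1 a2 a3 a4 a5 a6; simp only [rv]; try split_ifs <;> omega)
      refine Tr_congr h2 ?_
      intro J K t a1 a2 a3 a4 a5 a6
      simp [contrib2, hcc, hj1e]; try split_ifs <;> omega
    · rw [if_neg hj1e]
      have h2 := Tr_step h1 hi1 hi2 (j-1) k 2 2 j k (by omega) (by omega) (by omega) (by omega)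
        (by omega) (by omega) hj1 hj2 hk1 hk2 (by omega) (by omega)
        (fun J K t => 2 ≤ j ∧ t = 2 ∧ J = j-1 ∧ K = k)
        (by intro J K t a1 a2 a3 a4 a5 a6; simp only [rv]; try split_ifs <;> omega)
      refine Tr_congr h2 ?_
      intro J K t a1 a2 a3 a4 a5 a6
      simp [contrib2, hcc, hj1e]; try split_ifs <;> omega
  · rw [if_neg hcc]
    refine Tr_congr h1 ?_
    intro J K t a1 a2 a3 a4 a5 a6
    simp [contrib2, hcc]; try split_ifs <;> omega

theorem Tr_sit3 {n m : Nat} {i : Int} {dp0 dp' : List (List (List (List Int)))}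
    {S : (Int → Int → Int → Int) → Int → Int → Int → Int} (c? : Option Char)
    (h : Tr n m i dp0 dp' S) (hi1 : 0 ≤ i) (hi2 : i < n)
    (j k : Int) (hj1 : 0 ≤ j) (hj2 : j ≤ m) (hk1 : 0 ≤ k) (hk2 : k ≤ m) :
    Tr n m i dp0 (sit3 c? i j k dp')
      (fun f J K t => S f J K t + contrib3 c? f j k J K t) := by
  simp only [sit3]
  have h1 := Tr_stay h hi1 hi2 j k 3 hj1 hj2 hk1 hk2 (by omega) (by omega)
  by_cases hcd : c? = some 'd'
  · rw [if_pos hcd]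
    by_cases hk1e : k = 1
    · rw [if_pos hk1e]
      have h2 := Tr_step h1 hi1 hi2 0 0 0 3 j k (by omega) (by omega) (by omega) (by omega)
        (by omega) (by omega) hj1 hj2 hk1 hk2 (by omega) (by omega)
        (fun J K t => t = 0 ∧ J = 0 ∧ K = 0)
        (by intro J K t a1 a2 a3 a4 a5 a6; simp only [rv]; try split_ifs <;> omega)
      refine Tr_congr h2 ?_
      intro J K t a1 a2 a3 a4 a5 a6
      simp [contrib3, hcd, hk1e]; try split_ifs <;> omega
    · rw [if_neg hk1e]
      have h2 := Tr_step h1 hi1 hi2 0 (k-1) 3 3 j k (by omega) (by omega) (by omega) (by omega)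
        (by omega) (by omega) hj1 hj2 hk1 hk2 (by omega) (by omega)
        (fun J K t => 2 ≤ k ∧ t = 3 ∧ J = 0 ∧ K = k-1)
        (by intro J K t a1 a2 a3 a4 a5 a6; simp only [rv]; try split_ifs <;> omega)
      refine Tr_congr h2 ?_
      intro J K t a1 a2 a3 a4 a5 a6
      simp [contrib3, hcd, hk1e]; try split_ifs <;> omega
  · rw [if_neg hcd]
    refine Tr_congr h1 ?_
    intro J K t a1 a2 a3 a4 a5 a6
    simp [contrib3, hcd]; try split_ifs <;> omega

theorem Tr_body {n m : Nat} {i : Int} {dp0 dp' : List (List (List (List Int)))}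
    {S : (Int → Int → Int → Int) → Int → Int → Int → Int} (s : String)
    (h : Tr n m i dp0 dp' S) (hi1 : 0 ≤ i) (hi2 : i < n)
    (j k : Int) (hj1 : 0 ≤ j) (hj2 : j ≤ m) (hk1 : 0 ≤ k) (hk2 : k ≤ m)
    (hnn : ∀ st : Int, 0 ≤ st → st < 4 → 0 ≤ aGet dp0 i j k st) :
    Tr n m i dp0 (aBody s i dp' j k)
      (fun f J K t => S f J K t + contrib (PySem.Str.pyGet? s i) f j k J K t) := by
  have hread : ∀ st : Int, 0 ≤ st → st < 4 → aGet dp' i j k st = aGet dp0 i j k st :=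
    fun st h1 h2 => h.2.1 i j k st hi1 (by omega) (by omega) hj1 (by omega) hk1 (by omega) h1 h2
  simp only [aBody]
  by_cases hz : (aCell dp' i j k).sum = 0
  · rw [if_pos hz]
    have hsum := cell_sum h.1 i j k hi1 (by omega) hj1 (by omega) hk1 (by omega)
    rw [hread 0 (by omega) (by omega), hread 1 (by omega) (by omega),
        hread 2 (by omega) (by omega), hread 3 (by omega) (by omega)] at hsum
    have hzero : ∀ st : Int, 0 ≤ st → st < 4 → aGet dp0 i j k st = 0 := by
      have n0 := hnn 0 (by omega) (by omega)
      have n1 := hnn 1 (by omega) (by omega)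
      have n2 := hnn 2 (by omega) (by omega)
      have n3 := hnn 3 (by omega) (by omega)
      intro st h1 h2
      have hst : st = 0 ∨ st = 1 ∨ st = 2 ∨ st = 3 := by omega
      rcases hst with rfl | rfl | rfl | rfl <;> omega
    refine Tr_congr h ?_
    intro J K t h1 h2 h3 h4 h5 h6
    rw [contrib_zero _ _ _ _ _ _ _ hzero, add_zero]
  · rw [if_neg hz]
    have h0 := Tr_sit0 (PySem.Str.pyGet? s i) h hi1 hi2 j k hj1 hj2 hk1 hk2
    have h1 := Tr_sit1 (PySem.Str.pyGet? s i) h0 hi1 hi2 j k hj1 hj2 hk1 hk2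
    have h2 := Tr_sit2 (PySem.Str.pyGet? s i) h1 hi1 hi2 j k hj1 hj2 hk1 hk2
    have h3 := Tr_sit3 (PySem.Str.pyGet? s i) h2 hi1 hi2 j k hj1 hj2 hk1 hk2
    refine Tr_congr h3 ?_
    intro J K t a1 a2 a3 a4 a5 a6
    simp only [contrib]
    ring

-- reductions of contrib at each fixed state t (c a plain char)
theorem contrib_t0 (c : Char) (f : Int → Int → Int → Int) (j k J K : Int) :
    contrib (some c) f j k J K 0 =
      (if J = j ∧ K = k then f j k 0 else 0)
    + (if c = 'a' ∧ J = j+1 ∧ K = k then f j k 0 else 0)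
    + (if c = 'd' ∧ k = 1 ∧ J = 0 ∧ K = 0 then f j k 3 else 0) := by
  simp only [contrib, contrib0, contrib1, contrib2, contrib3]
  norm_num
  try ring

theorem contrib_t1 (c : Char) (f : Int → Int → Int → Int) (j k J K : Int) :
    contrib (some c) f j k J K 1 =
      (if ¬c = 'a' ∧ c = 'b' ∧ j > 0 ∧ J = j ∧ K = k+1 then f j k 0 else 0)
    + (if J = j ∧ K = k then f j k 1 else 0)
    + (if c = 'b' ∧ J = j ∧ K = k+1 then f j k 1 else 0) := by
  simp only [contrib, contrib0, contrib1, contrib2, contrib3]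
  norm_num
  try ring

theorem contrib_t2 (c : Char) (f : Int → Int → Int → Int) (j k J K : Int) :
    contrib (some c) f j k J K 2 =
      (if ¬c = 'b' ∧ c = 'c' ∧ ¬j = 1 ∧ 2 ≤ j ∧ J = j-1 ∧ K = k then f j k 1 else 0)
    + (if J = j ∧ K = k then f j k 2 else 0)
    + (if c = 'c' ∧ ¬j = 1 ∧ 2 ≤ j ∧ J = j-1 ∧ K = k then f j k 2 else 0) := by
  simp only [contrib, contrib0, contrib1, contrib2, contrib3]
  norm_num
  try ring

theorem contrib_t3 (c : Char) (f : Int → Int → Int → Int) (j k J K : Int) :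
    contrib (some c) f j k J K 3 =
      (if ¬c = 'b' ∧ c = 'c' ∧ j = 1 ∧ J = 0 ∧ K = k then f j k 1 else 0)
    + (if c = 'c' ∧ j = 1 ∧ J = 0 ∧ K = k then f j k 2 else 0)
    + (if J = j ∧ K = k then f j k 3 else 0)
    + (if c = 'd' ∧ ¬k = 1 ∧ 2 ≤ k ∧ J = 0 ∧ K = k-1 then f j k 3 else 0) := by
  simp only [contrib, contrib0, contrib1, contrib2, contrib3]
  norm_num
  try ring

theorem sum_pinP_aux (len : Nat) : ∀ (a b : Int), (b - a).toNat = len →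
    ∀ (g v : Int → Int) (P : Prop) (inst : Decidable P) (x0 : Int),
    (∀ x, a ≤ x → x < b → g x = if P ∧ x = x0 then v x else 0) →
    ((PySem.List.pyRange a b 1).map g).sum = if P ∧ a ≤ x0 ∧ x0 < b then v x0 else 0 := by
  induction len with
  | zero =>
    intro a b hab g v P inst x0 hg
    rw [PySem.List.pyRange_one_eq_nil (by omega)]
    simp only [List.map_nil, List.sum_nil]
    rw [if_neg]; rintro ⟨hP, h1, h2⟩; omega
  | succ len ih =>
    intro a b hab g v P inst x0 hg
    rw [PySem.List.pyRange_one_cons (by omega)]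
    simp only [List.map_cons, List.sum_cons]
    rw [ih (a+1) b (by omega) g v P inst x0 (fun x h1 h2 => hg x (by omega) h2)]
    rw [hg a (by omega) (by omega)]
    by_cases hP : P
    · simp only [hP, true_and]
      by_cases hx : a = x0
      · subst hx
        rw [if_pos rfl, if_neg (by omega), if_pos (by omega)]
        ring
      · rw [if_neg hx]
        split_ifs <;> omega
    · simp [hP]

theorem sum_pinP (a b : Int) (g v : Int → Int) (P : Prop) [inst : Decidable P] (x0 : Int)
    (hg : ∀ x, a ≤ x → x < b → g x = if P ∧ x = x0 then v x else 0) :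
    ((PySem.List.pyRange a b 1).map g).sum = if P ∧ a ≤ x0 ∧ x0 < b then v x0 else 0 :=
  sum_pinP_aux (b - a).toNat a b rfl g v P inst x0 hg

theorem sum_ite_const (l : List Int) (P : Prop) [Decidable P] (g : Int → Int) :
    (l.map (fun x => if P then g x else 0)).sum = if P then (l.map g).sum else 0 := by
  split_ifs with h <;> simp

def grd (m : Int) (f : Int → Int → Int → Int) : Int → Int → Int → Int :=
  fun j k t => if 0 ≤ j ∧ j ≤ m ∧ 0 ≤ k ∧ k ≤ m then f j k t else 0

theorem gridsum_t0 (m : Nat) (c : Char) (f : Int → Int → Int → Int) (J K : Int)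
    (hJ1 : 0 ≤ J) (hJ2 : J ≤ (m:Int)) (hK1 : 0 ≤ K) (hK2 : K ≤ (m:Int)) :
    ((PySem.List.pyRange 0 ((m:Int)+1) 1).map (fun j =>
      ((PySem.List.pyRange 0 ((m:Int)+1) 1).map (fun k => contrib (some c) f j k J K 0)).sum)).sum
    = grd (m:Int) f J K 0 + (if c = 'a' then grd (m:Int) f (J-1) K 0 else 0)
      + (if c = 'd' ∧ J = 0 ∧ K = 0 then
           ((PySem.List.pyRange 0 ((m:Int)+1) 1).map (fun x => grd (m:Int) f x 1 3)).sum else 0) := by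
  have hinner : ∀ j ∈ PySem.List.pyRange 0 ((m:Int)+1) 1,
      ((PySem.List.pyRange 0 ((m:Int)+1) 1).map (fun k => contrib (some c) f j k J K 0)).sum
      = (if (J = j) ∧ 0 ≤ K ∧ K < (m:Int)+1 then f j K 0 else 0)
      + (if (c = 'a' ∧ J = j+1) ∧ 0 ≤ K ∧ K < (m:Int)+1 then f j K 0 else 0)
      + (if ((c = 'd' ∧ J = 0 ∧ K = 0) ∧ (0:Int) ≤ 1 ∧ (1:Int) < (m:Int)+1) then f j 1 3 else 0) := by
    intro j hj
    rw [List.map_congr_left (fun k _ => contrib_t0 c f j k J K)]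
    rw [PySem.List.sum_map_add_int, PySem.List.sum_map_add_int]
    rw [sum_pinP 0 ((m:Int)+1) _ (fun k => f j k 0) (J = j) K
          (by intro x h1 h2; split_ifs <;> first | rfl | omega)]
    rw [sum_pinP 0 ((m:Int)+1) _ (fun k => f j k 0) (c = 'a' ∧ J = j+1) K
          (by intro x h1 h2
              by_cases hc : c = 'a'
              · simp only [hc, true_and]; split_ifs <;> first | rfl | omega
              · simp [hc])]
    rw [sum_pinP 0 ((m:Int)+1) _ (fun k => f j k 3) (c = 'd' ∧ J = 0 ∧ K = 0) 1
          (by intro x h1 h2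
              by_cases hc : c = 'd'
              · simp only [hc, true_and]; split_ifs <;> first | rfl | omega
              · simp [hc])]
  rw [List.map_congr_left hinner]
  rw [PySem.List.sum_map_add_int, PySem.List.sum_map_add_int]
  rw [sum_pinP 0 ((m:Int)+1) _ (fun j => f j K 0) (0 ≤ K ∧ K < (m:Int)+1) J
        (by intro x h1 h2; split_ifs <;> first | rfl | omega)]
  rw [sum_pinP 0 ((m:Int)+1) _ (fun j => f j K 0) (c = 'a' ∧ (0 ≤ K ∧ K < (m:Int)+1)) (J-1)
        (by intro x h1 h2
            by_cases hc : c = 'a'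
            · simp only [hc, true_and]; split_ifs <;> first | rfl | omega
            · simp [hc])]
  rw [sum_ite_const]
  have hline : ((PySem.List.pyRange 0 ((m:Int)+1) 1).map (fun x => grd (m:Int) f x 1 3)).sum
      = if (1:Int) ≤ (m:Int) then ((PySem.List.pyRange 0 ((m:Int)+1) 1).map (fun x => f x 1 3)).sum else 0 := by
    have e : ∀ x ∈ PySem.List.pyRange 0 ((m:Int)+1) 1,
        grd (m:Int) f x 1 3 = if (1:Int) ≤ (m:Int) then f x 1 3 else 0 := by
      intro x hx
      have hb := PySem.List.mem_pyRange_one.mp hx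
      simp only [grd]
      split_ifs <;> first | rfl | omega
    rw [List.map_congr_left e, sum_ite_const]
  rw [hline]
  simp only [grd]
  have had : ¬(('a':Char) = 'd') := by decide
  have hda : ¬(('d':Char) = 'a') := by decide
  by_cases hca : c = 'a'
  · subst hca
    simp only [had, eq_self_iff_true, true_and, false_and, and_false, if_false]
    split_ifs <;> omega
  · by_cases hcd : c = 'd'
    · subst hcd
      simp only [hda, eq_self_iff_true, true_and, false_and, and_false, if_false]
      split_ifs <;> omega
    · simp only [hca, hcd, eq_self_iff_true, true_and, false_and, and_false, if_false]
      split_ifs <;> omega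

theorem gridsum_t1 (m : Nat) (c : Char) (f : Int → Int → Int → Int) (J K : Int)
    (hJ1 : 0 ≤ J) (hJ2 : J ≤ (m:Int)) (hK1 : 0 ≤ K) (hK2 : K ≤ (m:Int)) :
    ((PySem.List.pyRange 0 ((m:Int)+1) 1).map (fun j =>
      ((PySem.List.pyRange 0 ((m:Int)+1) 1).map (fun k => contrib (some c) f j k J K 1)).sum)).sum
    = grd (m:Int) f J K 1
      + (if c = 'b' then (if J > 0 then grd (m:Int) f J (K-1) 0 else 0) + grd (m:Int) f J (K-1) 1 else 0) := by
  by_cases hcb : c = 'b'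
  · subst hcb
    have hinner : ∀ j ∈ PySem.List.pyRange 0 ((m:Int)+1) 1,
        ((PySem.List.pyRange 0 ((m:Int)+1) 1).map (fun k => contrib (some 'b') f j k J K 1)).sum
        = (if (0 < j ∧ J = j) ∧ 0 ≤ K-1 ∧ K-1 < (m:Int)+1 then f j (K-1) 0 else 0)
        + (if (J = j) ∧ 0 ≤ K ∧ K < (m:Int)+1 then f j K 1 else 0)
        + (if (J = j) ∧ 0 ≤ K-1 ∧ K-1 < (m:Int)+1 then f j (K-1) 1 else 0) := by
      intro j hj
      have e : ∀ k ∈ PySem.List.pyRange 0 ((m:Int)+1) 1,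
          contrib (some 'b') f j k J K 1 =
            (if 0 < j ∧ J = j ∧ K = k+1 then f j k 0 else 0)
          + (if J = j ∧ K = k then f j k 1 else 0)
          + (if J = j ∧ K = k+1 then f j k 1 else 0) := by
        intro k hk
        rw [contrib_t1]
        simp [(by decide : ¬(('b':Char) = 'a'))]
      rw [List.map_congr_left e]
      rw [PySem.List.sum_map_add_int, PySem.List.sum_map_add_int]
      rw [sum_pinP 0 ((m:Int)+1) _ (fun k => f j k 0) (0 < j ∧ J = j) (K-1)
            (by intro x h1 h2; split_ifs <;> first | rfl | omega)]
      rw [sum_pinP 0 ((m:Int)+1) _ (fun k => f j k 1) (J = j) K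
            (by intro x h1 h2; split_ifs <;> first | rfl | omega)]
      rw [sum_pinP 0 ((m:Int)+1) _ (fun k => f j k 1) (J = j) (K-1)
            (by intro x h1 h2; split_ifs <;> first | rfl | omega)]
    rw [List.map_congr_left hinner]
    rw [PySem.List.sum_map_add_int, PySem.List.sum_map_add_int]
    rw [sum_pinP 0 ((m:Int)+1) _ (fun j => f j (K-1) 0) ((0 < J) ∧ (0 ≤ K-1 ∧ K-1 < (m:Int)+1)) J
          (by intro x h1 h2; split_ifs <;> first | rfl | omega)]
    rw [sum_pinP 0 ((m:Int)+1) _ (fun j => f j K 1) (0 ≤ K ∧ K < (m:Int)+1) J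
          (by intro x h1 h2; split_ifs <;> first | rfl | omega)]
    rw [sum_pinP 0 ((m:Int)+1) _ (fun j => f j (K-1) 1) (0 ≤ K-1 ∧ K-1 < (m:Int)+1) J
          (by intro x h1 h2; split_ifs <;> first | rfl | omega)]
    simp only [grd, eq_self_iff_true, if_true, true_and]
    split_ifs <;> omega
  · have hinner : ∀ j ∈ PySem.List.pyRange 0 ((m:Int)+1) 1,
        ((PySem.List.pyRange 0 ((m:Int)+1) 1).map (fun k => contrib (some c) f j k J K 1)).sum
        = (if (J = j) ∧ 0 ≤ K ∧ K < (m:Int)+1 then f j K 1 else 0) := by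
      intro j hj
      have e : ∀ k ∈ PySem.List.pyRange 0 ((m:Int)+1) 1,
          contrib (some c) f j k J K 1 = (if J = j ∧ K = k then f j k 1 else 0) := by
        intro k hk
        rw [contrib_t1]
        simp [hcb]
      rw [List.map_congr_left e]
      rw [sum_pinP 0 ((m:Int)+1) _ (fun k => f j k 1) (J = j) K
            (by intro x h1 h2; split_ifs <;> first | rfl | omega)]
    rw [List.map_congr_left hinner]
    rw [sum_pinP 0 ((m:Int)+1) _ (fun j => f j K 1) (0 ≤ K ∧ K < (m:Int)+1) J
          (by intro x h1 h2; split_ifs <;> first | rfl | omega)]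
    simp only [grd, hcb, if_false]
    split_ifs <;> omega

theorem gridsum_t2 (m : Nat) (c : Char) (f : Int → Int → Int → Int) (J K : Int)
    (hJ1 : 0 ≤ J) (hJ2 : J ≤ (m:Int)) (hK1 : 0 ≤ K) (hK2 : K ≤ (m:Int)) :
    ((PySem.List.pyRange 0 ((m:Int)+1) 1).map (fun j =>
      ((PySem.List.pyRange 0 ((m:Int)+1) 1).map (fun k => contrib (some c) f j k J K 2)).sum)).sum
    = grd (m:Int) f J K 2
      + (if c = 'c' ∧ 1 ≤ J then grd (m:Int) f (J+1) K 1 + grd (m:Int) f (J+1) K 2 else 0) := by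
  by_cases hcc : c = 'c'
  · subst hcc
    have hinner : ∀ j ∈ PySem.List.pyRange 0 ((m:Int)+1) 1,
        ((PySem.List.pyRange 0 ((m:Int)+1) 1).map (fun k => contrib (some 'c') f j k J K 2)).sum
        = (if (¬j = 1 ∧ 2 ≤ j ∧ J = j-1) ∧ 0 ≤ K ∧ K < (m:Int)+1 then f j K 1 else 0)
        + (if (J = j) ∧ 0 ≤ K ∧ K < (m:Int)+1 then f j K 2 else 0)
        + (if (¬j = 1 ∧ 2 ≤ j ∧ J = j-1) ∧ 0 ≤ K ∧ K < (m:Int)+1 then f j K 2 else 0) := by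
      intro j hj
      have e : ∀ k ∈ PySem.List.pyRange 0 ((m:Int)+1) 1,
          contrib (some 'c') f j k J K 2 =
            (if (¬j = 1 ∧ 2 ≤ j ∧ J = j-1) ∧ K = k then f j k 1 else 0)
          + (if J = j ∧ K = k then f j k 2 else 0)
          + (if (¬j = 1 ∧ 2 ≤ j ∧ J = j-1) ∧ K = k then f j k 2 else 0) := by
        intro k hk
        rw [contrib_t2]
        simp [(by decide : ¬(('c':Char) = 'b')), and_assoc]
      rw [List.map_congr_left e]
      rw [PySem.List.sum_map_add_int, PySem.List.sum_map_add_int]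
      rw [sum_pinP 0 ((m:Int)+1) _ (fun k => f j k 1) (¬j = 1 ∧ 2 ≤ j ∧ J = j-1) K
            (by intro x h1 h2; split_ifs <;> first | rfl | omega)]
      rw [sum_pinP 0 ((m:Int)+1) _ (fun k => f j k 2) (J = j) K
            (by intro x h1 h2; split_ifs <;> first | rfl | omega)]
      rw [sum_pinP 0 ((m:Int)+1) _ (fun k => f j k 2) (¬j = 1 ∧ 2 ≤ j ∧ J = j-1) K
            (by intro x h1 h2; split_ifs <;> first | rfl | omega)]
    rw [List.map_congr_left hinner]
    rw [PySem.List.sum_map_add_int, PySem.List.sum_map_add_int]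
    rw [sum_pinP 0 ((m:Int)+1) _ (fun j => f j K 1) ((2 ≤ J+1) ∧ (0 ≤ K ∧ K < (m:Int)+1)) (J+1)
          (by intro x h1 h2; split_ifs <;> first | rfl | omega)]
    rw [sum_pinP 0 ((m:Int)+1) _ (fun j => f j K 2) (0 ≤ K ∧ K < (m:Int)+1) J
          (by intro x h1 h2; split_ifs <;> first | rfl | omega)]
    rw [sum_pinP 0 ((m:Int)+1) _ (fun j => f j K 2) ((2 ≤ J+1) ∧ (0 ≤ K ∧ K < (m:Int)+1)) (J+1)
          (by intro x h1 h2; split_ifs <;> first | rfl | omega)]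
    simp only [grd, eq_self_iff_true, if_true, true_and]
    split_ifs <;> omega
  · have hinner : ∀ j ∈ PySem.List.pyRange 0 ((m:Int)+1) 1,
        ((PySem.List.pyRange 0 ((m:Int)+1) 1).map (fun k => contrib (some c) f j k J K 2)).sum
        = (if (J = j) ∧ 0 ≤ K ∧ K < (m:Int)+1 then f j K 2 else 0) := by
      intro j hj
      have e : ∀ k ∈ PySem.List.pyRange 0 ((m:Int)+1) 1,
          contrib (some c) f j k J K 2 = (if J = j ∧ K = k then f j k 2 else 0) := by
        intro k hk
        rw [contrib_t2]
        simp [hcc]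
      rw [List.map_congr_left e]
      rw [sum_pinP 0 ((m:Int)+1) _ (fun k => f j k 2) (J = j) K
            (by intro x h1 h2; split_ifs <;> first | rfl | omega)]
    rw [List.map_congr_left hinner]
    rw [sum_pinP 0 ((m:Int)+1) _ (fun j => f j K 2) (0 ≤ K ∧ K < (m:Int)+1) J
          (by intro x h1 h2; split_ifs <;> first | rfl | omega)]
    simp only [grd, hcc, false_and, if_false]
    split_ifs <;> omega

theorem gridsum_t3 (m : Nat) (c : Char) (f : Int → Int → Int → Int) (J K : Int)
    (hJ1 : 0 ≤ J) (hJ2 : J ≤ (m:Int)) (hK1 : 0 ≤ K) (hK2 : K ≤ (m:Int))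
    (hz3 : ∀ j k : Int, 1 ≤ j → f j k 3 = 0) :
    ((PySem.List.pyRange 0 ((m:Int)+1) 1).map (fun j =>
      ((PySem.List.pyRange 0 ((m:Int)+1) 1).map (fun k => contrib (some c) f j k J K 3)).sum)).sum
    = grd (m:Int) f J K 3
      + (if c = 'c' ∧ J = 0 then grd (m:Int) f 1 K 1 + grd (m:Int) f 1 K 2 else 0)
      + (if c = 'd' ∧ J = 0 ∧ 1 ≤ K then grd (m:Int) f 0 (K+1) 3 else 0) := by
  by_cases hcc : c = 'c'
  · subst hcc
    have hinner : ∀ j ∈ PySem.List.pyRange 0 ((m:Int)+1) 1,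
        ((PySem.List.pyRange 0 ((m:Int)+1) 1).map (fun k => contrib (some 'c') f j k J K 3)).sum
        = (if (j = 1 ∧ J = 0) ∧ 0 ≤ K ∧ K < (m:Int)+1 then f j K 1 else 0)
        + (if (j = 1 ∧ J = 0) ∧ 0 ≤ K ∧ K < (m:Int)+1 then f j K 2 else 0)
        + (if (J = j) ∧ 0 ≤ K ∧ K < (m:Int)+1 then f j K 3 else 0) := by
      intro j hj
      have e : ∀ k ∈ PySem.List.pyRange 0 ((m:Int)+1) 1,
          contrib (some 'c') f j k J K 3 =
            (if (j = 1 ∧ J = 0) ∧ K = k then f j k 1 else 0)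
          + (if (j = 1 ∧ J = 0) ∧ K = k then f j k 2 else 0)
          + (if J = j ∧ K = k then f j k 3 else 0) := by
        intro k hk
        rw [contrib_t3]
        simp [(by decide : ¬(('c':Char) = 'b')), (by decide : ¬(('c':Char) = 'd')), and_assoc]
      rw [List.map_congr_left e]
      rw [PySem.List.sum_map_add_int, PySem.List.sum_map_add_int]
      rw [sum_pinP 0 ((m:Int)+1) _ (fun k => f j k 1) (j = 1 ∧ J = 0) K
            (by intro x h1 h2; split_ifs <;> first | rfl | omega)]
      rw [sum_pinP 0 ((m:Int)+1) _ (fun k => f j k 2) (j = 1 ∧ J = 0) K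
            (by intro x h1 h2; split_ifs <;> first | rfl | omega)]
      rw [sum_pinP 0 ((m:Int)+1) _ (fun k => f j k 3) (J = j) K
            (by intro x h1 h2; split_ifs <;> first | rfl | omega)]
    rw [List.map_congr_left hinner]
    rw [PySem.List.sum_map_add_int, PySem.List.sum_map_add_int]
    rw [sum_pinP 0 ((m:Int)+1) _ (fun j => f j K 1) ((J = 0) ∧ (0 ≤ K ∧ K < (m:Int)+1)) 1
          (by intro x h1 h2; split_ifs <;> first | rfl | omega)]
    rw [sum_pinP 0 ((m:Int)+1) _ (fun j => f j K 2) ((J = 0) ∧ (0 ≤ K ∧ K < (m:Int)+1)) 1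
          (by intro x h1 h2; split_ifs <;> first | rfl | omega)]
    rw [sum_pinP 0 ((m:Int)+1) _ (fun j => f j K 3) (0 ≤ K ∧ K < (m:Int)+1) J
          (by intro x h1 h2; split_ifs <;> first | rfl | omega)]
    simp only [grd, eq_self_iff_true, if_true, true_and,
      (by decide : ¬(('c':Char) = 'd')), false_and, if_false]
    split_ifs <;> omega
  · by_cases hcd : c = 'd'
    · subst hcd
      have hinner : ∀ j ∈ PySem.List.pyRange 0 ((m:Int)+1) 1,
          ((PySem.List.pyRange 0 ((m:Int)+1) 1).map (fun k => contrib (some 'd') f j k J K 3)).sum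
          = (if (J = j) ∧ 0 ≤ K ∧ K < (m:Int)+1 then f j K 3 else 0)
          + (if ((2 ≤ K+1 ∧ J = 0) ∧ 0 ≤ K+1 ∧ K+1 < (m:Int)+1) then f j (K+1) 3 else 0) := by
        intro j hj
        have e : ∀ k ∈ PySem.List.pyRange 0 ((m:Int)+1) 1,
            contrib (some 'd') f j k J K 3 =
              (if J = j ∧ K = k then f j k 3 else 0)
            + (if (2 ≤ K+1 ∧ J = 0) ∧ k = K+1 then f j k 3 else 0) := by
          intro k hk
          rw [contrib_t3]
          have e1 : ¬(('d':Char) = 'b') := by decide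
          have e2 : ¬(('d':Char) = 'c') := by decide
          simp only [e1, e2, eq_self_iff_true, true_and, false_and, and_false, if_false,
            not_false_iff, zero_add, add_zero]
          split_ifs <;> first | rfl | omega
        rw [List.map_congr_left e]
        rw [PySem.List.sum_map_add_int]
        rw [sum_pinP 0 ((m:Int)+1) _ (fun k => f j k 3) (J = j) K
              (by intro x h1 h2; split_ifs <;> first | rfl | omega)]
        rw [sum_pinP 0 ((m:Int)+1) _ (fun k => f j k 3) (2 ≤ K+1 ∧ J = 0) (K+1)
              (by intro x h1 h2; split_ifs <;> first | rfl | omega)]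
      rw [List.map_congr_left hinner]
      rw [PySem.List.sum_map_add_int]
      rw [sum_pinP 0 ((m:Int)+1) _ (fun j => f j K 3) (0 ≤ K ∧ K < (m:Int)+1) J
            (by intro x h1 h2; split_ifs <;> first | rfl | omega)]
      rw [sum_ite_const]
      have hlast : ((PySem.List.pyRange 0 ((m:Int)+1) 1).map (fun j => f j (K+1) 3)).sum
          = f 0 (K+1) 3 := by
        rw [sum_pinP 0 ((m:Int)+1) _ (fun j => f j (K+1) 3) True 0
              (by intro x h1 h2
                  by_cases hx : x = 0
                  · subst hx; simp
                  · rw [if_neg (by intro hh; exact hx hh.2), hz3 x (K+1) (by omega)])]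
        rw [if_pos ⟨trivial, by omega, by omega⟩]
      rw [hlast]
      simp only [grd, eq_self_iff_true, true_and,
        (by decide : ¬(('d':Char) = 'c')), false_and, if_false]
      split_ifs <;> omega
    · have hinner : ∀ j ∈ PySem.List.pyRange 0 ((m:Int)+1) 1,
          ((PySem.List.pyRange 0 ((m:Int)+1) 1).map (fun k => contrib (some c) f j k J K 3)).sum
          = (if (J = j) ∧ 0 ≤ K ∧ K < (m:Int)+1 then f j K 3 else 0) := by
        intro j hj
        have e : ∀ k ∈ PySem.List.pyRange 0 ((m:Int)+1) 1,
            contrib (some c) f j k J K 3 = (if J = j ∧ K = k then f j k 3 else 0) := by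
          intro k hk
          rw [contrib_t3]
          simp [hcc, hcd]
        rw [List.map_congr_left e]
        rw [sum_pinP 0 ((m:Int)+1) _ (fun k => f j k 3) (J = j) K
              (by intro x h1 h2; split_ifs <;> first | rfl | omega)]
      rw [List.map_congr_left hinner]
      rw [sum_pinP 0 ((m:Int)+1) _ (fun j => f j K 3) (0 ≤ K ∧ K < (m:Int)+1) J
            (by intro x h1 h2; split_ifs <;> first | rfl | omega)]
      simp only [grd, hcc, hcd, false_and, if_false]
      split_ifs <;> omega


def f0 : Int → Int → Int → Int := fun j k t => if j = 0 ∧ k = 0 ∧ t = 0 then 1 else 0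

def pull (m : Int) (c : Char) (F : Int → Int → Int → Int) : Int → Int → Int → Int :=
  fun J K t =>
    if t = 0 then
      PySem.Int.mod (grd m F J K 0 + (if c = 'a' then grd m F (J-1) K 0 else 0)
        + (if c = 'd' ∧ J = 0 ∧ K = 0 then
             ((PySem.List.pyRange 0 (m+1) 1).map (fun x => grd m F x 1 3)).sum else 0)) M1
    else if t = 1 then
      PySem.Int.mod (grd m F J K 1
        + (if c = 'b' then (if J > 0 then grd m F J (K-1) 0 else 0) + grd m F J (K-1) 1 else 0)) M1
    else if t = 2 then
      PySem.Int.mod (grd m F J K 2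
        + (if c = 'c' ∧ 1 ≤ J then grd m F (J+1) K 1 + grd m F (J+1) K 2 else 0)) M1
    else
      PySem.Int.mod (grd m F J K 3
        + (if c = 'c' ∧ J = 0 then grd m F 1 K 1 + grd m F 1 K 2 else 0)
        + (if c = 'd' ∧ J = 0 ∧ 1 ≤ K then grd m F 0 (K+1) 3 else 0)) M1

def layer (m : Int) (cs : List Char) : Int → Int → Int → Int :=
  cs.foldl (fun f c => pull m c f) f0

theorem mod_nonneg' (x : Int) : 0 ≤ PySem.Int.mod x M1 := by
  rw [PySem.Int.mod_eq_emod_of_pos M1_pos]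
  exact Int.emod_nonneg x (by norm_num [M1])

theorem mod_lt' (x : Int) : PySem.Int.mod x M1 < M1 := by
  rw [PySem.Int.mod_eq_emod_of_pos M1_pos]
  exact Int.emod_lt_of_pos x M1_pos

theorem mod_zero' : PySem.Int.mod 0 M1 = 0 := by
  rw [PySem.Int.mod_eq_emod_of_pos M1_pos]; simp

theorem pull_nonneg (m : Int) (c : Char) (f : Int → Int → Int → Int) (J K t : Int) :
    0 ≤ pull m c f J K t := by
  unfold pull; split_ifs <;> exact mod_nonneg' _

theorem layer_nonneg (m : Int) (cs : List Char) (J K t : Int) : 0 ≤ layer m cs J K t := by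
  unfold layer
  induction cs using List.reverseRecOn with
  | nil => simp only [List.foldl_nil, f0]; split_ifs <;> omega
  | append_singleton cs c ih => rw [List.foldl_append, List.foldl_cons, List.foldl_nil]
                                exact pull_nonneg _ _ _ _ _ _

theorem pull_lt (m : Int) (c : Char) (f : Int → Int → Int → Int) (J K t : Int) :
    pull m c f J K t < M1 := by
  unfold pull; split_ifs <;> exact mod_lt' _

theorem layer_lt (m : Int) (cs : List Char) (J K t : Int) : layer m cs J K t < M1 := by
  unfold layer
  induction cs using List.reverseRecOn with
  | nil => simp only [List.foldl_nil, f0, M1]; split_ifs <;> omega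
  | append_singleton cs c ih =>
      rw [List.foldl_append, List.foldl_cons, List.foldl_nil]
      exact pull_lt _ _ _ _ _ _

theorem pull_z3 (m : Int) (c : Char) (f : Int → Int → Int → Int)
    (hf : ∀ j k : Int, 1 ≤ j → f j k 3 = 0) (J K : Int) (hJ : 1 ≤ J) :
    pull m c f J K 3 = 0 := by
  unfold pull
  rw [if_neg (by omega), if_neg (by omega), if_neg (by omega)]
  rw [if_neg (by rintro ⟨-, h, -⟩; omega), if_neg (by rintro ⟨-, h, -⟩; omega)]
  have : grd m f J K 3 = 0 := by
    unfold grd; split_ifs with h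
    · exact hf J K hJ
    · rfl
  rw [this]
  simpa using mod_zero'

theorem layer_z3 (m : Int) (cs : List Char) (J K : Int) (hJ : 1 ≤ J) :
    layer m cs J K 3 = 0 := by
  unfold layer
  induction cs using List.reverseRecOn generalizing J K with
  | nil => simp only [List.foldl_nil, f0]; rw [if_neg (by rintro ⟨h, -⟩; omega)]
  | append_singleton cs c ih =>
      rw [List.foldl_append, List.foldl_cons, List.foldl_nil]
      exact pull_z3 m c _ (fun j k hj => ih j k hj) J K hJ

-- the collapsed grid sum equals one pull step
theorem gridsum_pull (m : Nat) (c : Char) (f : Int → Int → Int → Int) (J K t : Int)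
    (hJ1 : 0 ≤ J) (hJ2 : J ≤ (m:Int)) (hK1 : 0 ≤ K) (hK2 : K ≤ (m:Int))
    (ht1 : 0 ≤ t) (ht2 : t < 4)
    (hz3 : ∀ j k : Int, 1 ≤ j → f j k 3 = 0) :
    PySem.Int.mod (((PySem.List.pyRange 0 ((m:Int)+1) 1).map (fun j =>
      ((PySem.List.pyRange 0 ((m:Int)+1) 1).map (fun k => contrib (some c) f j k J K t)).sum)).sum) M1
    = pull (m:Int) c f J K t := by
  have ht : t = 0 ∨ t = 1 ∨ t = 2 ∨ t = 3 := by omega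
  rcases ht with rfl | rfl | rfl | rfl
  · rw [gridsum_t0 m c f J K hJ1 hJ2 hK1 hK2]; simp [pull]
  · rw [gridsum_t1 m c f J K hJ1 hJ2 hK1 hK2]; simp [pull]
  · rw [gridsum_t2 m c f J K hJ1 hJ2 hK1 hK2]; simp [pull]
  · rw [gridsum_t3 m c f J K hJ1 hJ2 hK1 hK2 hz3]; simp [pull]

-- fold of the inner (k) loop
theorem Tr_foldk {n m : Nat} {i : Int} {dp0 dp' : List (List (List (List Int)))}
    {S : (Int → Int → Int → Int) → Int → Int → Int → Int} (s : String)
    (h : Tr n m i dp0 dp' S) (hi1 : 0 ≤ i) (hi2 : i < n)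
    (j : Int) (hj1 : 0 ≤ j) (hj2 : j ≤ m)
    (hnn : ∀ j' k' st : Int, 0 ≤ j' → j' ≤ m → 0 ≤ k' → k' ≤ m → 0 ≤ st → st < 4 →
      0 ≤ aGet dp0 i j' k' st)
    (l : List Int) (hl : ∀ x ∈ l, 0 ≤ x ∧ x ≤ (m:Int)) :
    Tr n m i dp0 (l.foldl (fun dp k => aBody s i dp j k) dp')
      (fun f J K t => S f J K t +
        (l.map (fun k => contrib (PySem.Str.pyGet? s i) f j k J K t)).sum) := by
  induction l generalizing dp' S with
  | nil => exact Tr_congr h (by intro J K t _ _ _ _ _ _; simp)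
  | cons k l ih =>
      rw [List.foldl_cons]
      have hk := hl k List.mem_cons_self
      have hb := Tr_body s h hi1 hi2 j k hj1 hj2 hk.1 hk.2
        (fun st h1 h2 => hnn j k st hj1 hj2 hk.1 hk.2 h1 h2)
      have hf := ih hb (fun x hx => hl x (List.mem_cons_of_mem _ hx))
      refine Tr_congr hf ?_
      intro J K t _ _ _ _ _ _
      simp only [List.map_cons, List.sum_cons]
      ring

-- fold of the outer (j) loop
theorem Tr_foldj {n m : Nat} {i : Int} {dp0 dp' : List (List (List (List Int)))}
    {S : (Int → Int → Int → Int) → Int → Int → Int → Int} (s : String)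
    (h : Tr n m i dp0 dp' S) (hi1 : 0 ≤ i) (hi2 : i < n)
    (hnn : ∀ j' k' st : Int, 0 ≤ j' → j' ≤ m → 0 ≤ k' → k' ≤ m → 0 ≤ st → st < 4 →
      0 ≤ aGet dp0 i j' k' st)
    (lj : List Int) (hlj : ∀ x ∈ lj, 0 ≤ x ∧ x ≤ (m:Int)) :
    Tr n m i dp0 (lj.foldl (fun dp j =>
        (PySem.List.pyRange 0 ((m:Int)+1) 1).foldl (fun dp k => aBody s i dp j k) dp) dp')
      (fun f J K t => S f J K t +
        (lj.map (fun j => ((PySem.List.pyRange 0 ((m:Int)+1) 1).map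
          (fun k => contrib (PySem.Str.pyGet? s i) f j k J K t)).sum)).sum) := by
  induction lj generalizing dp' S with
  | nil => exact Tr_congr h (by intro J K t _ _ _ _ _ _; simp)
  | cons j lj ih =>
      rw [List.foldl_cons]
      have hj := hlj j List.mem_cons_self
      have hb := Tr_foldk s h hi1 hi2 j hj.1 hj.2 hnn (PySem.List.pyRange 0 ((m:Int)+1) 1)
        (fun x hx => by have := PySem.List.mem_pyRange_one.mp hx; omega)
      have hf := ih hb (fun x hx => hlj x (List.mem_cons_of_mem _ hx))
      refine Tr_congr hf ?_
      intro J K t _ _ _ _ _ _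
      simp only [List.map_cons, List.sum_cons]
      ring

theorem aSet_shape {dp : List (List (List (List Int)))} {n m : Nat} (hs : ShapeA dp n m)
    (a b c d v : Int) (ha1 : 0 ≤ a) (ha2 : a < (n:Int)+1)
    (hb1 : -((m:Int)+2) ≤ b) (hb2 : b < (m:Int)+2)
    (hc1 : -((m:Int)+2) ≤ c) (hc2 : c < (m:Int)+2)
    (hd1 : 0 ≤ d) (hd2 : d < 4) :
    ShapeA (aSet dp a b c d v) n m := by
  have hA : rv (n+1) a < n+1 := rv_lt _ _ (by omega) (by omega)
  have hB : rv (m+2) b < m+2 := rv_lt _ _ (by omega) (by omega)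
  have hC : rv (m+2) c < m+2 := rv_lt _ _ (by omega) (by omega)
  have hrow := shape_row hs _ hA
  have hq := shape_q hs _ _ hA hB
  have hp := shape_p hs _ _ _ hA hB hC
  rw [aSet_eq hs _ _ _ _ _ (by omega) ha2 hb1 hb2 hc1 hc2 (by omega) hd2]
  constructor
  · rw [List.length_set]; exact hs.1
  · intro r hr
    rcases List.mem_or_eq_of_mem_set hr with h | h
    · exact hs.2 r h
    · subst h
      constructor
      · rw [List.length_set]; exact hrow
      · intro q hq'
        rcases List.mem_or_eq_of_mem_set hq' with h | h
        · exact (hs.2 _ (mem_getD dp _ [] (by rw [hs.1]; omega))).2 q h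
        · subst h
          constructor
          · rw [List.length_set]; exact hq
          · intro p hp'
            rcases List.mem_or_eq_of_mem_set hp' with h | h
            · have h1 := hs.2 _ (mem_getD dp _ [] (by rw [hs.1]; omega))
              exact (h1.2 _ (mem_getD _ _ [] (by rw [h1.1]; omega))).2 p h
            · rw [h, List.length_set]; exact hp

theorem aSet_get {dp : List (List (List (List Int)))} {n m : Nat} (hs : ShapeA dp n m)
    (a b c d v : Int) (ha1 : 0 ≤ a) (ha2 : a < (n:Int)+1)
    (hb1 : -((m:Int)+2) ≤ b) (hb2 : b < (m:Int)+2)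
    (hc1 : -((m:Int)+2) ≤ c) (hc2 : c < (m:Int)+2)
    (hd1 : 0 ≤ d) (hd2 : d < 4)
    (a' b' c' d' : Int) (ha1' : 0 ≤ a') (ha2' : a' < (n:Int)+1)
    (hb1' : 0 ≤ b') (hb2' : b' < (m:Int)+2)
    (hc1' : 0 ≤ c') (hc2' : c' < (m:Int)+2)
    (hd1' : 0 ≤ d') (hd2' : d' < 4) :
    aGet (aSet dp a b c d v) a' b' c' d' =
      if a = a' ∧ rv (m+2) b = b'.toNat ∧ rv (m+2) c = c'.toNat ∧ d = d' then v
      else aGet dp a' b' c' d' := by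
  have hs' := aSet_shape hs a b c d v ha1 ha2 hb1 hb2 hc1 hc2 hd1 hd2
  have hA : rv (n+1) a < n+1 := rv_lt _ _ (by omega) (by omega)
  have hB : rv (m+2) b < m+2 := rv_lt _ _ (by omega) (by omega)
  have hC : rv (m+2) c < m+2 := rv_lt _ _ (by omega) (by omega)
  have hrow := shape_row hs _ hA
  have hq := shape_q hs _ _ hA hB
  have hp := shape_p hs _ _ _ hA hB hC
  rw [aGet_eq hs' a' b' c' d' (by omega) ha2' (by omega) hb2' (by omega) hc2' (by omega) hd2']
  rw [aGet_eq hs a' b' c' d' (by omega) ha2' (by omega) hb2' (by omega) hc2' (by omega) hd2']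
  rw [aSet_eq hs _ _ _ _ _ (by omega) ha2 hb1 hb2 hc1 hc2 (by omega) hd2]
  rw [getD_set _ _ _ _ _ (by rw [hs.1]; exact hA)]
  by_cases hAe : rv (n+1) a = rv (n+1) a'
  · rw [if_pos hAe, ← hAe]
    rw [getD_set _ _ _ _ _ (by rw [hrow]; exact hB)]
    by_cases hBe : rv (m+2) b = rv (m+2) b'
    · rw [if_pos hBe, ← hBe]
      rw [getD_set _ _ _ _ _ (by rw [hq]; exact hC)]
      by_cases hCe : rv (m+2) c = rv (m+2) c'
      · rw [if_pos hCe, ← hCe]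
        rw [getD_set _ _ _ _ _ (by rw [hp]; exact (rv_lt 4 d (by omega) (by omega)))]
        by_cases hDe : rv 4 d = rv 4 d'
        · rw [if_pos hDe, ← hDe]
          rw [if_pos ?hit]
          case hit =>
            rw [rv_nonneg _ _ ha1'] at hAe
            rw [rv_nonneg _ _ hb1'] at hBe
            rw [rv_nonneg _ _ hc1'] at hCe
            rw [rv_nonneg _ _ ha1] at hAe
            rw [rv_nonneg _ _ hd1, rv_nonneg _ _ hd1'] at hDe
            refine ⟨by omega, hBe, hCe, by omega⟩
        · rw [if_neg hDe, if_neg ?nohit]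
          case nohit =>
            rw [rv_nonneg _ _ hd1, rv_nonneg _ _ hd1'] at hDe
            rintro ⟨-, -, -, h4⟩; exact hDe (by omega)
      · rw [if_neg hCe, if_neg ?nohit]
        case nohit =>
          rw [rv_nonneg _ _ hc1'] at hCe
          rintro ⟨-, -, h3, -⟩; exact hCe h3
    · rw [if_neg hBe, if_neg ?nohit]
      case nohit =>
        rw [rv_nonneg _ _ hb1'] at hBe
        rintro ⟨-, h2, -, -⟩; exact hBe h2
  · rw [if_neg hAe, if_neg ?nohit]
    case nohit =>
      rw [rv_nonneg _ _ ha1, rv_nonneg _ _ ha1'] at hAe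
      rintro ⟨h1, -, -, -⟩; exact hAe (by omega)

-- the all-zero initial table
theorem dp0_shape (n m : Nat) :
    ShapeA ((PySem.List.pyRange 0 ((n:Int)+1) 1).map (fun _ =>
      (PySem.List.pyRange 0 ((m:Int)+2) 1).map (fun _ =>
        (PySem.List.pyRange 0 ((m:Int)+2) 1).map (fun _ =>
          (PySem.List.pyRange 0 4 1).map (fun _ => (0 : Int)))))) n m := by
  constructor
  · rw [List.length_map, PySem.List.length_pyRange_one]; omega
  · intro r hr
    obtain ⟨x, -, rfl⟩ := List.mem_map.mp hr
    refine ⟨by rw [List.length_map, PySem.List.length_pyRange_one]; omega, ?_⟩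
    intro q hq
    obtain ⟨y, -, rfl⟩ := List.mem_map.mp hq
    refine ⟨by rw [List.length_map, PySem.List.length_pyRange_one]; omega, ?_⟩
    intro p hp
    obtain ⟨z, -, rfl⟩ := List.mem_map.mp hp
    rw [List.length_map, PySem.List.length_pyRange_one]
    rfl

theorem dp0_zero (n m : Nat) (a b c d : Int)
    (ha1 : 0 ≤ a) (ha2 : a < (n:Int)+1) (hb1 : 0 ≤ b) (hb2 : b < (m:Int)+2)
    (hc1 : 0 ≤ c) (hc2 : c < (m:Int)+2) (hd1 : 0 ≤ d) (hd2 : d < 4) :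
    aGet ((PySem.List.pyRange 0 ((n:Int)+1) 1).map (fun _ =>
      (PySem.List.pyRange 0 ((m:Int)+2) 1).map (fun _ =>
        (PySem.List.pyRange 0 ((m:Int)+2) 1).map (fun _ =>
          (PySem.List.pyRange 0 4 1).map (fun _ => (0 : Int)))))) a b c d = 0 := by
  unfold aGet aCell aGet3
  rw [PySem.List.pyGetD_map_pyRange_of_nonneg _ _ _ _ ha1 ha2]
  rw [PySem.List.pyGetD_map_pyRange_of_nonneg _ _ _ _ hb1 hb2]
  rw [PySem.List.pyGetD_map_pyRange_of_nonneg _ _ _ _ hc1 hc2]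
  rw [PySem.List.pyGetD_map_pyRange_of_nonneg _ _ _ _ hd1 hd2]

-- contrib only reads f at (j,k,0..3)
theorem contrib_congr (c? : Option Char) (f g : Int → Int → Int → Int) (j k J K t : Int)
    (h0 : ∀ st : Int, 0 ≤ st → st < 4 → f j k st = g j k st) :
    contrib c? f j k J K t = contrib c? g j k J K t := by
  simp only [contrib, contrib0, contrib1, contrib2, contrib3,
    h0 0 (by omega) (by omega), h0 1 (by omega) (by omega),
    h0 2 (by omega) (by omega), h0 3 (by omega) (by omega)]

-- the outer induction over the string: A's table layers realize the pull iterates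
theorem A_layers (s : String) (n m : Nat) (hn : s.toList.length = n) :
    ∀ N : Nat, N ≤ n →
    ShapeA ((PySem.List.pyRange 0 (N:Int) 1).foldl (fun dp i =>
      (PySem.List.pyRange 0 ((m:Int)+1) 1).foldl (fun dp j =>
        (PySem.List.pyRange 0 ((m:Int)+1) 1).foldl (fun dp k =>
          aBody s i dp j k) dp) dp)
      (aSet ((PySem.List.pyRange 0 ((n:Int)+1) 1).map (fun _ =>
        (PySem.List.pyRange 0 ((m:Int)+2) 1).map (fun _ =>
          (PySem.List.pyRange 0 ((m:Int)+2) 1).map (fun _ =>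
            (PySem.List.pyRange 0 4 1).map (fun _ => (0 : Int)))))) 0 0 0 0 1)) n m ∧
    (∀ J K t : Int, 0 ≤ J → J ≤ (m:Int) → 0 ≤ K → K ≤ (m:Int) → 0 ≤ t → t < 4 →
      aGet ((PySem.List.pyRange 0 (N:Int) 1).foldl (fun dp i =>
        (PySem.List.pyRange 0 ((m:Int)+1) 1).foldl (fun dp j =>
          (PySem.List.pyRange 0 ((m:Int)+1) 1).foldl (fun dp k =>
            aBody s i dp j k) dp) dp)
        (aSet ((PySem.List.pyRange 0 ((n:Int)+1) 1).map (fun _ =>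
          (PySem.List.pyRange 0 ((m:Int)+2) 1).map (fun _ =>
            (PySem.List.pyRange 0 ((m:Int)+2) 1).map (fun _ =>
              (PySem.List.pyRange 0 4 1).map (fun _ => (0 : Int)))))) 0 0 0 0 1))
        (N:Int) J K t = layer (m:Int) (s.toList.take N) J K t) ∧
    (∀ lvl : Nat, N < lvl → lvl ≤ n → ∀ J K t : Int,
      0 ≤ J → J ≤ (m:Int) → 0 ≤ K → K ≤ (m:Int) → 0 ≤ t → t < 4 →
      aGet ((PySem.List.pyRange 0 (N:Int) 1).foldl (fun dp i =>
        (PySem.List.pyRange 0 ((m:Int)+1) 1).foldl (fun dp j =>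
          (PySem.List.pyRange 0 ((m:Int)+1) 1).foldl (fun dp k =>
            aBody s i dp j k) dp) dp)
        (aSet ((PySem.List.pyRange 0 ((n:Int)+1) 1).map (fun _ =>
          (PySem.List.pyRange 0 ((m:Int)+2) 1).map (fun _ =>
            (PySem.List.pyRange 0 ((m:Int)+2) 1).map (fun _ =>
              (PySem.List.pyRange 0 4 1).map (fun _ => (0 : Int)))))) 0 0 0 0 1))
        (lvl:Int) J K t = 0) := by
  intro N
  induction N with
  | zero =>
    intro _
    rw [show PySem.List.pyRange 0 (((0:Nat)):Int) 1 = [] from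
          PySem.List.pyRange_one_eq_nil (by omega), List.foldl_nil]
    have hsh0 := dp0_shape n m
    have hsh1 := aSet_shape hsh0 0 0 0 0 1 (by omega) (by omega) (by omega) (by omega)
      (by omega) (by omega) (by omega) (by omega)
    refine ⟨hsh1, ?_, ?_⟩
    · intro J K t hJ1 hJ2 hK1 hK2 ht1 ht2
      push_cast
      rw [aSet_get hsh0 0 0 0 0 1 (by omega) (by omega) (by omega) (by omega)
            (by omega) (by omega) (by omega) (by omega)
            0 J K t (by omega) (by omega) hJ1 (by omega) hK1 (by omega) ht1 ht2]
      have hrv : rv (m+2) 0 = 0 := by simp [rv]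
      rw [hrv]
      simp only [List.take_zero, layer, List.foldl_nil, f0]
      by_cases h : J = 0 ∧ K = 0 ∧ t = 0
      · rw [if_pos ⟨by trivial, by omega, by omega, by omega⟩, if_pos h]
      · rw [if_neg (by rintro ⟨-, e1, e2, e3⟩; exact h ⟨by omega, by omega, by omega⟩), if_neg h]
        exact dp0_zero n m 0 J K t (by omega) (by omega) hJ1 (by omega) hK1 (by omega) ht1 ht2
    · intro lvl h1 h2 J K t hJ1 hJ2 hK1 hK2 ht1 ht2
      rw [aSet_get hsh0 0 0 0 0 1 (by omega) (by omega) (by omega) (by omega)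
            (by omega) (by omega) (by omega) (by omega)
            (lvl:Int) J K t (by omega) (by omega) hJ1 (by omega) hK1 (by omega) ht1 ht2]
      rw [if_neg (by rintro ⟨h, -⟩; omega)]
      exact dp0_zero n m (lvl:Int) J K t (by omega) (by omega) hJ1 (by omega) hK1 (by omega) ht1 ht2
  | succ N ih =>
    intro hN1
    obtain ⟨P1, P2, P3⟩ := ih (by omega)
    set DN := (PySem.List.pyRange 0 (N:Int) 1).foldl (fun dp i =>
        (PySem.List.pyRange 0 ((m:Int)+1) 1).foldl (fun dp j =>
          (PySem.List.pyRange 0 ((m:Int)+1) 1).foldl (fun dp k =>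
            aBody s i dp j k) dp) dp)
        (aSet ((PySem.List.pyRange 0 ((n:Int)+1) 1).map (fun _ =>
          (PySem.List.pyRange 0 ((m:Int)+2) 1).map (fun _ =>
            (PySem.List.pyRange 0 ((m:Int)+2) 1).map (fun _ =>
              (PySem.List.pyRange 0 4 1).map (fun _ => (0 : Int)))))) 0 0 0 0 1) with hDN
    have hsplit : PySem.List.pyRange 0 ((N+1 : Nat):Int) 1
        = PySem.List.pyRange 0 (N:Int) 1 ++ [(N:Int)] := by
      push_cast
      exact PySem.List.pyRange_one_succ_right (by omega)
    rw [hsplit, List.foldl_append, List.foldl_cons, List.foldl_nil]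
    have hbase := Tr_base (i := (N:Int)) P1 (fun J K t a1 a2 a3 a4 a5 a6 => by
      have := P3 (N+1) (by omega) (by omega) J K t a1 a2 a3 a4 a5 a6
      push_cast at this
      rw [this]
      exact mod_zero')
    have hnn : ∀ j' k' st : Int, 0 ≤ j' → j' ≤ (m:Int) → 0 ≤ k' → k' ≤ (m:Int) →
        0 ≤ st → st < 4 → 0 ≤ aGet DN (N:Int) j' k' st := by
      intro j' k' st a1 a2 a3 a4 a5 a6
      rw [P2 j' k' st a1 a2 a3 a4 a5 a6]
      exact layer_nonneg _ _ _ _ _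
    have htr := Tr_foldj s hbase (by omega) (by exact_mod_cast (by omega : N < n)) hnn
      (PySem.List.pyRange 0 ((m:Int)+1) 1)
      (fun x hx => by have := PySem.List.mem_pyRange_one.mp hx; omega)
    obtain ⟨Q1, Q2, Q3⟩ := htr
    refine ⟨Q1, ?_, ?_⟩
    · intro J K t hJ1 hJ2 hK1 hK2 ht1 ht2
      have e := Q3 J K t hJ1 hJ2 hK1 hK2 ht1 ht2
      push_cast
      push_cast at e
      rw [e]
      have ez : aGet DN ((N:Int)+1) J K t = 0 := by
        have := P3 (N+1) (by omega) (by omega) J K t hJ1 hJ2 hK1 hK2 ht1 ht2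
        push_cast at this
        exact this
      rw [ez]
      beta_reduce
      rw [zero_add, zero_add]
      have hrepl : ((PySem.List.pyRange 0 ((m:Int)+1) 1).map (fun j =>
          ((PySem.List.pyRange 0 ((m:Int)+1) 1).map (fun k =>
            contrib (PySem.Str.pyGet? s (N:Int)) (fun a b c => aGet DN (N:Int) a b c) j k J K t)).sum)).sum
          = ((PySem.List.pyRange 0 ((m:Int)+1) 1).map (fun j =>
          ((PySem.List.pyRange 0 ((m:Int)+1) 1).map (fun k =>
            contrib (PySem.Str.pyGet? s (N:Int)) (layer (m:Int) (s.toList.take N)) j k J K t)).sum)).sum := by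
        refine congrArg List.sum (List.map_congr_left ?_)
        intro j hj
        refine congrArg List.sum (List.map_congr_left ?_)
        intro k hk
        have hjb := PySem.List.mem_pyRange_one.mp hj
        have hkb := PySem.List.mem_pyRange_one.mp hk
        exact contrib_congr _ _ _ j k J K t
          (fun st a1 a2 => P2 j k st (by omega) (by omega) (by omega) (by omega) a1 a2)
      rw [hrepl]
      have hchar : PySem.Str.pyGet? s (N:Int) = some (s.toList[N]'(by omega)) := by
        rw [PySem.Str.pyGet?_natCast]
        exact List.getElem?_eq_getElem (by omega)
      rw [hchar]
      rw [gridsum_pull m (s.toList[N]'(by omega)) (layer (m:Int) (s.toList.take N)) J K t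
            hJ1 hJ2 hK1 hK2 ht1 ht2 (fun j k hj => layer_z3 (m:Int) _ j k hj)]
      have htake : s.toList.take (N+1) = s.toList.take N ++ [s.toList[N]'(by omega)] := by
        rw [List.take_succ, List.getElem?_eq_getElem (by omega)]
        rfl
      rw [htake]
      unfold layer
      rw [List.foldl_append, List.foldl_cons, List.foldl_nil]
    · intro lvl h1 h2 J K t hJ1 hJ2 hK1 hK2 ht1 ht2
      rw [Q2 (lvl:Int) J K t (by omega) (by omega) (by omega) (by omega) (by omega)
            (by omega) (by omega) ht1 ht2]
      exact P3 lvl (by omega) h2 J K t hJ1 hJ2 hK1 hK2 ht1 ht2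

-- ================= B-side lemmas: the backward recursion =================

-- the "take" part of one step of fB
def takeB (c : Char) (v : List Char) (j k st : Int) : Int :=
  if st = 0 then
    (if c = 'a' then fB v (j+1) k 0
     else if c = 'b' ∧ j > 0 then fB v j (k+1) 1 else 0)
  else if st = 1 then
    (if c = 'b' then fB v j (k+1) 1
     else if c = 'c' then (if j = 1 then fB v 0 k 3 else fB v (j-1) k 2) else 0)
  else if st = 2 then
    (if c = 'c' then (if j = 1 then fB v 0 k 3 else fB v (j-1) k 2) else 0)
  else
    (if c = 'd' then (if k = 1 then fB v 0 0 0 else fB v 0 (k-1) 3) else 0)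

theorem fB_cons (c : Char) (v : List Char) (j k st : Int) :
    fB (c :: v) j k st = PySem.Int.mod (fB v j k st + takeB c v j k st) M1 := rfl

theorem fB_nonneg (v : List Char) (j k st : Int) : 0 ≤ fB v j k st := by
  cases v with
  | nil => simp only [fB]; split_ifs <;> omega
  | cons c cs => rw [show fB (c :: cs) j k st = _ from rfl]; exact mod_nonneg' _

theorem fB_lt (v : List Char) (j k st : Int) : fB v j k st < M1 := by
  cases v with
  | nil => simp only [fB, M1]; split_ifs <;> omega
  | cons c cs => rw [show fB (c :: cs) j k st = _ from rfl]; exact mod_lt' _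

-- completions from a state with j ≤ 0 in phase 2 never accept
theorem fB_z2neg (v : List Char) : ∀ j k : Int, j ≤ 0 → fB v j k 2 = 0 := by
  induction v with
  | nil =>
      intro j k hj
      simp only [fB]
      rw [if_neg (by rintro ⟨-, -, h⟩; omega)]
  | cons c cs ih =>
      intro j k hj
      rw [fB_cons]
      have hskip : fB cs j k 2 = 0 := ih j k hj
      have htake : takeB c cs j k 2 = 0 := by
        unfold takeB
        rw [if_neg (by omega), if_neg (by omega), if_pos rfl]
        split_ifs with h1 h2
        · omega
        · exact ih (j-1) k (by omega)
        · rfl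
      rw [hskip, htake, add_zero]
      exact mod_zero'

-- completions from a state with k ≤ 0 in phase 3 never accept
theorem fB_z3neg (v : List Char) : ∀ j k : Int, k ≤ 0 → fB v j k 3 = 0 := by
  induction v with
  | nil =>
      intro j k hk
      simp only [fB]
      rw [if_neg (by rintro ⟨-, -, h⟩; omega)]
  | cons c cs ih =>
      intro j k hk
      rw [fB_cons]
      have hskip : fB cs j k 3 = 0 := ih j k hk
      have htake : takeB c cs j k 3 = 0 := by
        unfold takeB
        rw [if_neg (by omega), if_neg (by omega), if_neg (by omega)]
        split_ifs with h1 h2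
        · omega
        · exact ih 0 (k-1) (by omega)
        · rfl
      rw [hskip, htake, add_zero]
      exact mod_zero'

-- a lower bound on the number of characters a completion needs
def costB (j k st : Int) : Int :=
  if st = 0 then (if j = 0 ∧ k = 0 then 0 else j + k + 2)
  else if st = 1 then j + k
  else if st = 2 then j + k
  else k

-- if fewer characters remain than the completion needs, there is no completion
theorem fB_cost_zero (v : List Char) : ∀ j k st : Int,
    costB j k st > (v.length : Int) → fB v j k st = 0 := by
  induction v with
  | nil =>
      intro j k st h
      simp only [List.length_nil, Int.natCast_zero] at h
      simp only [fB]
      rw [if_neg (by rintro ⟨rfl, rfl, rfl⟩; simp [costB] at h)]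
  | cons c cs ih =>
      intro j k st h
      simp only [List.length_cons] at h
      push_cast at h
      rw [fB_cons]
      have hskip : fB cs j k st = 0 := ih j k st (by omega)
      have htake : takeB c cs j k st = 0 := by
        unfold takeB
        unfold costB at h
        split_ifs with h0 h1 h2 h3 h4 h5 h6 h7 h8 h9 h10
        all_goals first
          | rfl
          | (apply ih; unfold costB; split_ifs <;> omega)
          | (split_ifs <;> first | rfl | (apply ih; unfold costB; split_ifs <;> omega))
      rw [hskip, htake, add_zero]
      exact mod_zero'

-- forward support: phases 0 and 1 need at least j + k consumed characters
theorem layer_supp (m : Int) (cs : List Char) : ∀ j k : Int, j + k > (cs.length : Int) →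
    layer m cs j k 0 = 0 ∧ layer m cs j k 1 = 0 := by
  induction cs using List.reverseRecOn with
  | nil =>
      intro j k h
      simp only [List.length_nil, Int.natCast_zero] at h
      unfold layer
      simp only [List.foldl_nil, f0]
      constructor <;> rw [if_neg (by rintro ⟨rfl, rfl, -⟩; omega)]
  | append_singleton cs c ih =>
      intro j k h
      simp only [List.length_append, List.length_cons, List.length_nil] at h
      push_cast at h
      have step : layer m (cs ++ [c]) = pull m c (layer m cs) := by
        unfold layer
        rw [List.foldl_append, List.foldl_cons, List.foldl_nil]
      rw [step]
      have g0 : ∀ a b : Int, a + b > (cs.length : Int) → grd m (layer m cs) a b 0 = 0 := by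
        intro a b hab
        unfold grd; split_ifs with hin
        · exact (ih a b hab).1
        · rfl
      have g1 : ∀ a b : Int, a + b > (cs.length : Int) → grd m (layer m cs) a b 1 = 0 := by
        intro a b hab
        unfold grd; split_ifs with hin
        · exact (ih a b hab).2
        · rfl
      constructor
      · unfold pull
        rw [if_pos rfl]
        rw [g0 j k (by omega)]
        have hd : ¬ (c = 'd' ∧ j = 0 ∧ k = 0) := by rintro ⟨-, rfl, rfl⟩; omega
        by_cases hca : c = 'a'
        · rw [if_pos hca, g0 (j-1) k (by omega), if_neg hd]; simpa using mod_zero'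
        · rw [if_neg hca, if_neg hd]; simpa using mod_zero'
      · unfold pull
        rw [if_neg (by omega), if_pos rfl]
        rw [g1 j k (by omega)]
        by_cases hcb : c = 'b'
        · rw [if_pos hcb, g1 j (k-1) (by omega)]
          by_cases hjp : j > 0
          · rw [if_pos hjp, g0 j (k-1) (by omega)]; simpa using mod_zero'
          · rw [if_neg hjp]; simpa using mod_zero'
        · rw [if_neg hcb]; simpa using mod_zero'

-- pull with the final reduction mod M1 removed
def pullRaw (m : Int) (c : Char) (F : Int → Int → Int → Int) (J K t : Int) : Int :=
    if t = 0 then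
      grd m F J K 0 + (if c = 'a' then grd m F (J-1) K 0 else 0)
        + (if c = 'd' ∧ J = 0 ∧ K = 0 then
             ((PySem.List.pyRange 0 (m+1) 1).map (fun x => grd m F x 1 3)).sum else 0)
    else if t = 1 then
      grd m F J K 1
        + (if c = 'b' then (if J > 0 then grd m F J (K-1) 0 else 0) + grd m F J (K-1) 1 else 0)
    else if t = 2 then
      grd m F J K 2
        + (if c = 'c' ∧ 1 ≤ J then grd m F (J+1) K 1 + grd m F (J+1) K 2 else 0)
    else
      grd m F J K 3
        + (if c = 'c' ∧ J = 0 then grd m F 1 K 1 + grd m F 1 K 2 else 0)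
        + (if c = 'd' ∧ J = 0 ∧ 1 ≤ K then grd m F 0 (K+1) 3 else 0)

theorem mod_modEq (x : Int) : PySem.Int.mod x M1 ≡ x [ZMOD M1] := by
  rw [PySem.Int.mod_eq_emod_of_pos M1_pos]
  exact (Int.emod_emod_of_dvd x dvd_rfl)

theorem pull_modEq (m : Int) (c : Char) (F : Int → Int → Int → Int) (J K t : Int) :
    pull m c F J K t ≡ pullRaw m c F J K t [ZMOD M1] := by
  unfold pull pullRaw
  split_ifs <;> exact mod_modEq _

theorem fB_cons_modEq (c : Char) (v : List Char) (j k st : Int) :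
    fB (c :: v) j k st ≡ fB v j k st + takeB c v j k st [ZMOD M1] := by
  rw [fB_cons]; exact mod_modEq _

theorem sum_modEq {α : Type} (s : Finset α) (f g : α → Int)
    (h : ∀ a ∈ s, f a ≡ g a [ZMOD M1]) :
    (∑ a ∈ s, f a) ≡ (∑ a ∈ s, g a) [ZMOD M1] := by
  classical
  induction s using Finset.induction_on with
  | empty => simp
  | @insert a s ha ih =>
      rw [Finset.sum_insert ha, Finset.sum_insert ha]
      exact Int.ModEq.add (h a (Finset.mem_insert_self a s))
        (ih (fun b hb => h b (Finset.mem_insert_of_mem hb)))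

-- the bilinear pairing of a forward grid vector with a backward value function
def GS (m : Nat) (F g : Int → Int → Int → Int) : Int :=
  ∑ J ∈ Finset.range (m+1), ∑ K ∈ Finset.range (m+1),
    (F (J:Int) (K:Int) 0 * g (J:Int) (K:Int) 0 + F (J:Int) (K:Int) 1 * g (J:Int) (K:Int) 1
     + F (J:Int) (K:Int) 2 * g (J:Int) (K:Int) 2 + F (J:Int) (K:Int) 3 * g (J:Int) (K:Int) 3)

-- index shifts over a cast range
-- index shifts over a cast range
theorem shift_pair (m : Nat) (A G : Int → Int) (hA : A (-1) = 0)
    (htop : A (m:Int) * G ((m:Int)+1) = 0) :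
    ∑ J ∈ Finset.range (m+1), A ((J:Int) - 1) * G (J:Int)
      = ∑ J ∈ Finset.range (m+1), A (J:Int) * G ((J:Int) + 1) := by
  rw [Finset.sum_range_succ' (fun J => A ((J:Int) - 1) * G (J:Int)) m]
  rw [Finset.sum_range_succ (fun J => A (J:Int) * G ((J:Int) + 1)) m]
  rw [htop, add_zero]
  have : A (((0:Nat):Int) - 1) * G ((0:Nat):Int) = 0 := by norm_num [hA]
  rw [this, add_zero]
  refine Finset.sum_congr rfl (fun x hx => ?_)
  have e1 : ((x+1 : Nat):Int) - 1 = (x:Int) := by push_cast; ring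
  have e2 : ((x+1 : Nat):Int) = (x:Int) + 1 := by push_cast; ring
  rw [e1, e2]

theorem shift_pair_up (m : Nat) (A G : Int → Int)
    (htop : A ((m:Int) + 1) * G (m:Int) = 0) (h0 : A 0 * G (-1) = 0) :
    ∑ J ∈ Finset.range (m+1), A ((J:Int) + 1) * G (J:Int)
      = ∑ J ∈ Finset.range (m+1), A (J:Int) * G ((J:Int) - 1) := by
  rw [Finset.sum_range_succ (fun J => A ((J:Int) + 1) * G (J:Int)) m]
  rw [Finset.sum_range_succ' (fun J => A (J:Int) * G ((J:Int) - 1)) m]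
  rw [htop, add_zero]
  have : A ((0:Nat):Int) * G (((0:Nat):Int) - 1) = 0 := by norm_num [h0]
  rw [this, add_zero]
  refine Finset.sum_congr rfl (fun x hx => ?_)
  have e1 : ((x+1 : Nat):Int) - 1 = (x:Int) := by push_cast; ring
  have e2 : ((x+1 : Nat):Int) = (x:Int) + 1 := by push_cast; ring
  rw [e1, e2]

-- a cast-indexed Kronecker sum
theorem sum_cast_ind (m : Nat) (h : Int → Int) (x : Int) :
    ∑ J ∈ Finset.range (m+1), (if (J:Int) = x then h (J:Int) else 0)
      = if 0 ≤ x ∧ x ≤ (m:Int) then h x else 0 := by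
  by_cases hx : 0 ≤ x ∧ x ≤ (m:Int)
  · rw [if_pos hx]
    rw [Finset.sum_eq_single_of_mem x.toNat (Finset.mem_range.mpr (by omega))]
    · rw [if_pos (by omega)]
      congr 1
      omega
    · intro b hb hne
      rw [if_neg (by intro he; apply hne; omega)]
  · rw [if_neg hx]
    apply Finset.sum_eq_zero
    intro b hb
    rw [Finset.mem_range] at hb
    rw [if_neg (by intro he; apply hx; omega)]

theorem grd_in (m : Int) (F : Int → Int → Int → Int) (j k t : Int)
    (h1 : 0 ≤ j) (h2 : j ≤ m) (h3 : 0 ≤ k) (h4 : k ≤ m) :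
    grd m F j k t = F j k t := by
  unfold grd; rw [if_pos ⟨h1, h2, h3, h4⟩]

-- reductions of pullRaw and takeB at literal t
theorem pullRaw_0 (m : Int) (c : Char) (F : Int → Int → Int → Int) (J K : Int) :
    pullRaw m c F J K 0 =
      grd m F J K 0 + (if c = 'a' then grd m F (J-1) K 0 else 0)
        + (if c = 'd' ∧ J = 0 ∧ K = 0 then
             ((PySem.List.pyRange 0 (m+1) 1).map (fun x => grd m F x 1 3)).sum else 0) := by
  simp [pullRaw]
theorem pullRaw_1 (m : Int) (c : Char) (F : Int → Int → Int → Int) (J K : Int) :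
    pullRaw m c F J K 1 =
      grd m F J K 1
        + (if c = 'b' then (if J > 0 then grd m F J (K-1) 0 else 0) + grd m F J (K-1) 1 else 0) := by
  norm_num [pullRaw]
theorem pullRaw_2 (m : Int) (c : Char) (F : Int → Int → Int → Int) (J K : Int) :
    pullRaw m c F J K 2 =
      grd m F J K 2
        + (if c = 'c' ∧ 1 ≤ J then grd m F (J+1) K 1 + grd m F (J+1) K 2 else 0) := by
  norm_num [pullRaw]
theorem pullRaw_3 (m : Int) (c : Char) (F : Int → Int → Int → Int) (J K : Int) :
    pullRaw m c F J K 3 =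
      grd m F J K 3
        + (if c = 'c' ∧ J = 0 then grd m F 1 K 1 + grd m F 1 K 2 else 0)
        + (if c = 'd' ∧ J = 0 ∧ 1 ≤ K then grd m F 0 (K+1) 3 else 0) := by
  norm_num [pullRaw]
theorem takeB_0 (c : Char) (v : List Char) (j k : Int) :
    takeB c v j k 0 = (if c = 'a' then fB v (j+1) k 0
     else if c = 'b' ∧ j > 0 then fB v j (k+1) 1 else 0) := by simp [takeB]
theorem takeB_1 (c : Char) (v : List Char) (j k : Int) :
    takeB c v j k 1 = (if c = 'b' then fB v j (k+1) 1
     else if c = 'c' then (if j = 1 then fB v 0 k 3 else fB v (j-1) k 2) else 0) := by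
  norm_num [takeB]
theorem takeB_2 (c : Char) (v : List Char) (j k : Int) :
    takeB c v j k 2 = (if c = 'c' then (if j = 1 then fB v 0 k 3 else fB v (j-1) k 2) else 0) := by
  norm_num [takeB]
theorem takeB_3 (c : Char) (v : List Char) (j k : Int) :
    takeB c v j k 3 = (if c = 'd' then (if k = 1 then fB v 0 0 0 else fB v 0 (k-1) 3) else 0) := by
  norm_num [takeB]


-- one exchange step: pairing the pulled-forward vector with the backward values
-- equals pairing the forward vector with the backward values one character earlier
theorem grd_jneg (m : Int) (F : Int → Int → Int → Int) (j k t : Int) (h : j < 0) :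
    grd m F j k t = 0 := by
  unfold grd; rw [if_neg (by omega)]
theorem grd_jbig (m : Int) (F : Int → Int → Int → Int) (j k t : Int) (h : m < j) :
    grd m F j k t = 0 := by
  unfold grd; rw [if_neg (by omega)]
theorem grd_kneg (m : Int) (F : Int → Int → Int → Int) (j k t : Int) (h : k < 0) :
    grd m F j k t = 0 := by
  unfold grd; rw [if_neg (by omega)]
theorem grd_kbig (m : Int) (F : Int → Int → Int → Int) (j k t : Int) (h : m < k) :
    grd m F j k t = 0 := by
  unfold grd; rw [if_neg (by omega)]

theorem sum_add_congr (s : Finset Nat) (f g h : Nat → Int)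
    (he : ∑ x ∈ s, g x = ∑ x ∈ s, h x) :
    ∑ x ∈ s, (f x + g x) = ∑ x ∈ s, (f x + h x) := by
  rw [Finset.sum_add_distrib, Finset.sum_add_distrib, he]

theorem case_a (m : Nat) (F : Int → Int → Int → Int) (v : List Char)
    (hb0 : ∀ k : Int, 0 ≤ k → k ≤ (m:Int) → F (m:Int) k 0 * fB v ((m:Int)+1) k 0 = 0) :
    GS m (pullRaw (m:Int) 'a' F) (fun j k t => fB v j k t)
      = GS m F (fun j k t => fB v j k t + takeB 'a' v j k t) := by
  unfold GS
  conv_rhs => rw [Finset.sum_comm]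
  rw [Finset.sum_comm]
  refine Finset.sum_congr rfl (fun K hK => ?_)
  have hK' := Finset.mem_range.mp hK
  have eL : ∀ J ∈ Finset.range (m+1),
      (pullRaw (m:Int) 'a' F (J:Int) (K:Int) 0 * (fun j k t => fB v j k t) (J:Int) (K:Int) 0
       + pullRaw (m:Int) 'a' F (J:Int) (K:Int) 1 * (fun j k t => fB v j k t) (J:Int) (K:Int) 1
       + pullRaw (m:Int) 'a' F (J:Int) (K:Int) 2 * (fun j k t => fB v j k t) (J:Int) (K:Int) 2
       + pullRaw (m:Int) 'a' F (J:Int) (K:Int) 3 * (fun j k t => fB v j k t) (J:Int) (K:Int) 3)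
      = ((F (J:Int) (K:Int) 0 * fB v (J:Int) (K:Int) 0 + F (J:Int) (K:Int) 1 * fB v (J:Int) (K:Int) 1
          + F (J:Int) (K:Int) 2 * fB v (J:Int) (K:Int) 2 + F (J:Int) (K:Int) 3 * fB v (J:Int) (K:Int) 3)
         + grd (m:Int) F ((J:Int) - 1) (K:Int) 0 * fB v (J:Int) (K:Int) 0) := by
    intro J hJ
    have hJ' := Finset.mem_range.mp hJ
    simp only [pullRaw_0, pullRaw_1, pullRaw_2, pullRaw_3,
      (by decide : ¬(('a':Char) = 'b')), (by decide : ¬(('a':Char) = 'c')),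
      (by decide : ¬(('a':Char) = 'd')), if_true, eq_self_iff_true, if_false,
      false_and, and_false, add_zero, zero_add]
    rw [grd_in _ F (J:Int) (K:Int) 0 (by omega) (by omega) (by omega) (by omega),
        grd_in _ F (J:Int) (K:Int) 1 (by omega) (by omega) (by omega) (by omega),
        grd_in _ F (J:Int) (K:Int) 2 (by omega) (by omega) (by omega) (by omega),
        grd_in _ F (J:Int) (K:Int) 3 (by omega) (by omega) (by omega) (by omega)]
    ring
  have eR : ∀ J ∈ Finset.range (m+1),
      ((fun j k t => F j k t) (J:Int) (K:Int) 0 * ((fun j k t => fB v j k t + takeB 'a' v j k t) (J:Int) (K:Int) 0)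
       + F (J:Int) (K:Int) 1 * ((fun j k t => fB v j k t + takeB 'a' v j k t) (J:Int) (K:Int) 1)
       + F (J:Int) (K:Int) 2 * ((fun j k t => fB v j k t + takeB 'a' v j k t) (J:Int) (K:Int) 2)
       + F (J:Int) (K:Int) 3 * ((fun j k t => fB v j k t + takeB 'a' v j k t) (J:Int) (K:Int) 3))
      = ((F (J:Int) (K:Int) 0 * fB v (J:Int) (K:Int) 0 + F (J:Int) (K:Int) 1 * fB v (J:Int) (K:Int) 1
          + F (J:Int) (K:Int) 2 * fB v (J:Int) (K:Int) 2 + F (J:Int) (K:Int) 3 * fB v (J:Int) (K:Int) 3)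
         + F (J:Int) (K:Int) 0 * fB v ((J:Int) + 1) (K:Int) 0) := by
    intro J hJ
    simp only [takeB_0, takeB_1, takeB_2, takeB_3,
      (by decide : ¬(('a':Char) = 'b')), (by decide : ¬(('a':Char) = 'c')),
      (by decide : ¬(('a':Char) = 'd')), if_true, eq_self_iff_true, if_false,
      false_and, add_zero]
    ring
  rw [Finset.sum_congr rfl eL, Finset.sum_congr rfl eR]
  refine sum_add_congr _ _ _ _ ?_
  rw [shift_pair m (fun x => grd (m:Int) F x (K:Int) 0) (fun x => fB v x (K:Int) 0)
        (grd_jneg _ F _ _ _ (by omega))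
        (by show grd (m:Int) F (m:Int) (K:Int) 0 * fB v ((m:Int)+1) (K:Int) 0 = 0
            rw [grd_in _ F (m:Int) (K:Int) 0 (by omega) (by omega) (by omega) (by omega)]
            exact hb0 (K:Int) (by omega) (by omega))]
  refine Finset.sum_congr rfl (fun J hJ => ?_)
  have hJ' := Finset.mem_range.mp hJ
  rw [grd_in _ F (J:Int) (K:Int) 0 (by omega) (by omega) (by omega) (by omega)]

theorem case_b (m : Nat) (F : Int → Int → Int → Int) (v : List Char)
    (hb1 : ∀ j : Int, 0 ≤ j → j ≤ (m:Int) →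
      F j (m:Int) 0 * fB v j ((m:Int)+1) 1 = 0 ∧ F j (m:Int) 1 * fB v j ((m:Int)+1) 1 = 0) :
    GS m (pullRaw (m:Int) 'b' F) (fun j k t => fB v j k t)
      = GS m F (fun j k t => fB v j k t + takeB 'b' v j k t) := by
  unfold GS
  refine Finset.sum_congr rfl (fun J hJ => ?_)
  have hJ' := Finset.mem_range.mp hJ
  have eL : ∀ K ∈ Finset.range (m+1),
      (pullRaw (m:Int) 'b' F (J:Int) (K:Int) 0 * (fun j k t => fB v j k t) (J:Int) (K:Int) 0
       + pullRaw (m:Int) 'b' F (J:Int) (K:Int) 1 * (fun j k t => fB v j k t) (J:Int) (K:Int) 1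
       + pullRaw (m:Int) 'b' F (J:Int) (K:Int) 2 * (fun j k t => fB v j k t) (J:Int) (K:Int) 2
       + pullRaw (m:Int) 'b' F (J:Int) (K:Int) 3 * (fun j k t => fB v j k t) (J:Int) (K:Int) 3)
      = ((F (J:Int) (K:Int) 0 * fB v (J:Int) (K:Int) 0 + F (J:Int) (K:Int) 1 * fB v (J:Int) (K:Int) 1
          + F (J:Int) (K:Int) 2 * fB v (J:Int) (K:Int) 2 + F (J:Int) (K:Int) 3 * fB v (J:Int) (K:Int) 3)
         + ((if (J:Int) > 0 then grd (m:Int) F (J:Int) ((K:Int) - 1) 0 else 0)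
            + grd (m:Int) F (J:Int) ((K:Int) - 1) 1) * fB v (J:Int) (K:Int) 1) := by
    intro K hK
    have hK' := Finset.mem_range.mp hK
    simp only [pullRaw_0, pullRaw_1, pullRaw_2, pullRaw_3,
      (by decide : ¬(('b':Char) = 'a')), (by decide : ¬(('b':Char) = 'c')),
      (by decide : ¬(('b':Char) = 'd')), if_true, if_false,
      false_and, add_zero, zero_add]
    rw [grd_in _ F (J:Int) (K:Int) 0 (by omega) (by omega) (by omega) (by omega),
        grd_in _ F (J:Int) (K:Int) 1 (by omega) (by omega) (by omega) (by omega),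
        grd_in _ F (J:Int) (K:Int) 2 (by omega) (by omega) (by omega) (by omega),
        grd_in _ F (J:Int) (K:Int) 3 (by omega) (by omega) (by omega) (by omega)]
    ring
  have eR : ∀ K ∈ Finset.range (m+1),
      (F (J:Int) (K:Int) 0 * ((fun j k t => fB v j k t + takeB 'b' v j k t) (J:Int) (K:Int) 0)
       + F (J:Int) (K:Int) 1 * ((fun j k t => fB v j k t + takeB 'b' v j k t) (J:Int) (K:Int) 1)
       + F (J:Int) (K:Int) 2 * ((fun j k t => fB v j k t + takeB 'b' v j k t) (J:Int) (K:Int) 2)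
       + F (J:Int) (K:Int) 3 * ((fun j k t => fB v j k t + takeB 'b' v j k t) (J:Int) (K:Int) 3))
      = ((F (J:Int) (K:Int) 0 * fB v (J:Int) (K:Int) 0 + F (J:Int) (K:Int) 1 * fB v (J:Int) (K:Int) 1
          + F (J:Int) (K:Int) 2 * fB v (J:Int) (K:Int) 2 + F (J:Int) (K:Int) 3 * fB v (J:Int) (K:Int) 3)
         + ((if (J:Int) > 0 then F (J:Int) (K:Int) 0 else 0) + F (J:Int) (K:Int) 1)
             * fB v (J:Int) ((K:Int) + 1) 1) := by
    intro K hK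
    simp only [takeB_0, takeB_1, takeB_2, takeB_3,
      (by decide : ¬(('b':Char) = 'a')), (by decide : ¬(('b':Char) = 'c')),
      (by decide : ¬(('b':Char) = 'd')), if_true, eq_self_iff_true, true_and, if_false,
      false_and, add_zero]
    by_cases hp : (J:Int) > 0
    · rw [if_pos hp, if_pos hp]; ring
    · rw [if_neg hp, if_neg hp]; ring
  rw [Finset.sum_congr rfl eL, Finset.sum_congr rfl eR]
  refine sum_add_congr _ _ _ _ ?_
  rw [shift_pair m
        (fun x => (if (J:Int) > 0 then grd (m:Int) F (J:Int) x 0 else 0) + grd (m:Int) F (J:Int) x 1)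
        (fun x => fB v (J:Int) x 1)
        (by show (if (J:Int) > 0 then grd (m:Int) F (J:Int) (-1) 0 else 0)
              + grd (m:Int) F (J:Int) (-1) 1 = 0
            rw [grd_kneg _ F _ _ _ (by omega), grd_kneg _ F _ _ _ (by omega)]
            simp)
        (by show ((if (J:Int) > 0 then grd (m:Int) F (J:Int) (m:Int) 0 else 0)
              + grd (m:Int) F (J:Int) (m:Int) 1) * fB v (J:Int) ((m:Int)+1) 1 = 0
            rw [grd_in _ F (J:Int) (m:Int) 0 (by omega) (by omega) (by omega) (by omega),
                grd_in _ F (J:Int) (m:Int) 1 (by omega) (by omega) (by omega) (by omega)]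
            have h1 := (hb1 (J:Int) (by omega) (by omega)).1
            have h2 := (hb1 (J:Int) (by omega) (by omega)).2
            by_cases hp : (J:Int) > 0
            · rw [if_pos hp, add_mul, h1, h2, add_zero]
            · rw [if_neg hp, zero_add, h2])]
  refine Finset.sum_congr rfl (fun K hK => ?_)
  have hK' := Finset.mem_range.mp hK
  show ((if (J:Int) > 0 then grd (m:Int) F (J:Int) (K:Int) 0 else 0)
        + grd (m:Int) F (J:Int) (K:Int) 1) * fB v (J:Int) ((K:Int)+1) 1 = _
  rw [grd_in _ F (J:Int) (K:Int) 0 (by omega) (by omega) (by omega) (by omega),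
      grd_in _ F (J:Int) (K:Int) 1 (by omega) (by omega) (by omega) (by omega)]

theorem sum_add_congr2 (s : Finset Nat) (f g1 g2 h1 h2 : Nat → Int)
    (e1 : ∑ x ∈ s, g1 x = ∑ x ∈ s, h2 x) (e2 : ∑ x ∈ s, g2 x = ∑ x ∈ s, h1 x) :
    ∑ x ∈ s, (f x + g1 x + g2 x) = ∑ x ∈ s, (f x + h1 x + h2 x) := by
  rw [Finset.sum_add_distrib, Finset.sum_add_distrib, Finset.sum_add_distrib,
      Finset.sum_add_distrib, e1, e2]
  ring

theorem case_c (m : Nat) (F : Int → Int → Int → Int) (v : List Char) :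
    GS m (pullRaw (m:Int) 'c' F) (fun j k t => fB v j k t)
      = GS m F (fun j k t => fB v j k t + takeB 'c' v j k t) := by
  unfold GS
  conv_rhs => rw [Finset.sum_comm]
  rw [Finset.sum_comm]
  refine Finset.sum_congr rfl (fun K hK => ?_)
  have hK' := Finset.mem_range.mp hK
  have eL : ∀ J ∈ Finset.range (m+1),
      (pullRaw (m:Int) 'c' F (J:Int) (K:Int) 0 * (fun j k t => fB v j k t) (J:Int) (K:Int) 0
       + pullRaw (m:Int) 'c' F (J:Int) (K:Int) 1 * (fun j k t => fB v j k t) (J:Int) (K:Int) 1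
       + pullRaw (m:Int) 'c' F (J:Int) (K:Int) 2 * (fun j k t => fB v j k t) (J:Int) (K:Int) 2
       + pullRaw (m:Int) 'c' F (J:Int) (K:Int) 3 * (fun j k t => fB v j k t) (J:Int) (K:Int) 3)
      = ((F (J:Int) (K:Int) 0 * fB v (J:Int) (K:Int) 0 + F (J:Int) (K:Int) 1 * fB v (J:Int) (K:Int) 1
          + F (J:Int) (K:Int) 2 * fB v (J:Int) (K:Int) 2 + F (J:Int) (K:Int) 3 * fB v (J:Int) (K:Int) 3)
         + (grd (m:Int) F ((J:Int)+1) (K:Int) 1 + grd (m:Int) F ((J:Int)+1) (K:Int) 2)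
             * fB v (J:Int) (K:Int) 2
         + (if (J:Int) = 0 then
              (grd (m:Int) F 1 (K:Int) 1 + grd (m:Int) F 1 (K:Int) 2) * fB v (J:Int) (K:Int) 3
            else 0)) := by
    intro J hJ
    have hJ' := Finset.mem_range.mp hJ
    simp only [pullRaw_0, pullRaw_1, pullRaw_2, pullRaw_3,
      (by decide : ¬(('c':Char) = 'a')), (by decide : ¬(('c':Char) = 'b')),
      (by decide : ¬(('c':Char) = 'd')), if_true, eq_self_iff_true, true_and, if_false,
      false_and, add_zero, zero_add]
    rw [grd_in _ F (J:Int) (K:Int) 0 (by omega) (by omega) (by omega) (by omega),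
        grd_in _ F (J:Int) (K:Int) 1 (by omega) (by omega) (by omega) (by omega),
        grd_in _ F (J:Int) (K:Int) 2 (by omega) (by omega) (by omega) (by omega),
        grd_in _ F (J:Int) (K:Int) 3 (by omega) (by omega) (by omega) (by omega)]
    by_cases h1J : 1 ≤ (J:Int)
    · simp only [if_pos h1J, if_neg (show ¬(J:Int) = 0 by omega)]
      ring
    · simp only [if_neg h1J, if_pos (show (J:Int) = 0 by omega)]
      rw [fB_z2neg v (J:Int) (K:Int) (by omega)]
      ring
  have eR : ∀ J ∈ Finset.range (m+1),
      (F (J:Int) (K:Int) 0 * ((fun j k t => fB v j k t + takeB 'c' v j k t) (J:Int) (K:Int) 0)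
       + F (J:Int) (K:Int) 1 * ((fun j k t => fB v j k t + takeB 'c' v j k t) (J:Int) (K:Int) 1)
       + F (J:Int) (K:Int) 2 * ((fun j k t => fB v j k t + takeB 'c' v j k t) (J:Int) (K:Int) 2)
       + F (J:Int) (K:Int) 3 * ((fun j k t => fB v j k t + takeB 'c' v j k t) (J:Int) (K:Int) 3))
      = ((F (J:Int) (K:Int) 0 * fB v (J:Int) (K:Int) 0 + F (J:Int) (K:Int) 1 * fB v (J:Int) (K:Int) 1
          + F (J:Int) (K:Int) 2 * fB v (J:Int) (K:Int) 2 + F (J:Int) (K:Int) 3 * fB v (J:Int) (K:Int) 3)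
         + (if (J:Int) = 1 then
              (F (J:Int) (K:Int) 1 + F (J:Int) (K:Int) 2) * fB v 0 (K:Int) 3
            else 0)
         + (if (J:Int) = 1 then 0 else
              (F (J:Int) (K:Int) 1 + F (J:Int) (K:Int) 2) * fB v ((J:Int)-1) (K:Int) 2)) := by
    intro J hJ
    simp only [takeB_0, takeB_1, takeB_2, takeB_3,
      (by decide : ¬(('c':Char) = 'a')), (by decide : ¬(('c':Char) = 'b')),
      (by decide : ¬(('c':Char) = 'd')), if_true, eq_self_iff_true, true_and, if_false,
      false_and, add_zero]
    by_cases h1 : (J:Int) = 1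
    · simp only [if_pos h1]
      ring
    · simp only [if_neg h1]
      ring
  rw [Finset.sum_congr rfl eL, Finset.sum_congr rfl eR]
  refine sum_add_congr2 _ _ _ _ _ _ ?_ ?_
  · -- shifted phase-2 gather vs the c-take at j ≠ 1
    rw [shift_pair_up m
          (fun x => grd (m:Int) F x (K:Int) 1 + grd (m:Int) F x (K:Int) 2)
          (fun x => fB v x (K:Int) 2)
          (by show (grd (m:Int) F ((m:Int)+1) (K:Int) 1 + grd (m:Int) F ((m:Int)+1) (K:Int) 2)
                * fB v (m:Int) (K:Int) 2 = 0
              rw [grd_jbig _ F _ _ _ (by omega), grd_jbig _ F _ _ _ (by omega)]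
              ring)
          (by show (grd (m:Int) F 0 (K:Int) 1 + grd (m:Int) F 0 (K:Int) 2) * fB v (-1) (K:Int) 2 = 0
              rw [fB_z2neg v (-1) (K:Int) (by omega)]
              ring)]
    refine Finset.sum_congr rfl (fun J hJ => ?_)
    have hJ' := Finset.mem_range.mp hJ
    show (grd (m:Int) F (J:Int) (K:Int) 1 + grd (m:Int) F (J:Int) (K:Int) 2)
        * fB v ((J:Int)-1) (K:Int) 2 = _
    by_cases h1 : (J:Int) = 1
    · simp only [if_pos h1, h1]
      rw [fB_z2neg v (1-1) (K:Int) (by omega)]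
      simp
    · simp only [if_neg h1]
      rw [grd_in _ F (J:Int) (K:Int) 1 (by omega) (by omega) (by omega) (by omega),
          grd_in _ F (J:Int) (K:Int) 2 (by omega) (by omega) (by omega) (by omega)]
  · -- the j = 1 entry into phase 3
    rw [sum_cast_ind m
          (fun x => (grd (m:Int) F 1 (K:Int) 1 + grd (m:Int) F 1 (K:Int) 2) * fB v x (K:Int) 3) 0]
    rw [sum_cast_ind m
          (fun x => (F x (K:Int) 1 + F x (K:Int) 2) * fB v 0 (K:Int) 3) 1]
    rw [if_pos ⟨le_refl 0, by positivity⟩]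
    by_cases hm1 : (1:Int) ≤ (m:Int)
    · rw [if_pos ⟨by omega, hm1⟩,
          grd_in _ F 1 (K:Int) 1 (by omega) (by omega) (by omega) (by omega),
          grd_in _ F 1 (K:Int) 2 (by omega) (by omega) (by omega) (by omega)]
    · rw [if_neg (by omega), grd_jbig _ F _ _ _ (by omega), grd_jbig _ F _ _ _ (by omega)]
      ring

theorem case_d (m : Nat) (F : Int → Int → Int → Int) (v : List Char)
    (hF3 : ∀ j k : Int, 1 ≤ j → F j k 3 = 0) :
    GS m (pullRaw (m:Int) 'd' F) (fun j k t => fB v j k t)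
      = GS m F (fun j k t => fB v j k t + takeB 'd' v j k t) := by
  have hT : ((PySem.List.pyRange 0 ((m:Int)+1) 1).map (fun x => grd (m:Int) F x 1 3)).sum
      = grd (m:Int) F 0 1 3 := by
    rw [sum_pinP 0 ((m:Int)+1) _ (fun x => grd (m:Int) F x 1 3) True 0
          (by intro x h1 h2
              by_cases hx : x = 0
              · rw [if_pos ⟨trivial, hx⟩, hx]
              · rw [if_neg (by intro hh; exact hx hh.2)]
                unfold grd
                split_ifs with hin
                · exact hF3 x 1 (by omega)
                · rfl)]
    rw [if_pos ⟨trivial, by omega, by omega⟩]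
  unfold GS
  refine Finset.sum_congr rfl (fun J hJ => ?_)
  have hJ' := Finset.mem_range.mp hJ
  by_cases hJ0 : (J:Int) = 0
  · -- row J = 0: the d-transitions live here
    have eL : ∀ K ∈ Finset.range (m+1),
        (pullRaw (m:Int) 'd' F (J:Int) (K:Int) 0 * (fun j k t => fB v j k t) (J:Int) (K:Int) 0
         + pullRaw (m:Int) 'd' F (J:Int) (K:Int) 1 * (fun j k t => fB v j k t) (J:Int) (K:Int) 1
         + pullRaw (m:Int) 'd' F (J:Int) (K:Int) 2 * (fun j k t => fB v j k t) (J:Int) (K:Int) 2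
         + pullRaw (m:Int) 'd' F (J:Int) (K:Int) 3 * (fun j k t => fB v j k t) (J:Int) (K:Int) 3)
        = ((F (J:Int) (K:Int) 0 * fB v (J:Int) (K:Int) 0 + F (J:Int) (K:Int) 1 * fB v (J:Int) (K:Int) 1
            + F (J:Int) (K:Int) 2 * fB v (J:Int) (K:Int) 2 + F (J:Int) (K:Int) 3 * fB v (J:Int) (K:Int) 3)
           + (if (K:Int) = 0 then grd (m:Int) F 0 1 3 * fB v 0 0 0 else 0)
           + (if 2 ≤ (K:Int)+1 then grd (m:Int) F 0 ((K:Int)+1) 3 else 0) * fB v 0 (K:Int) 3) := by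
      intro K hK
      have hK' := Finset.mem_range.mp hK
      simp only [pullRaw_0, pullRaw_1, pullRaw_2, pullRaw_3, hT,
        (by decide : ¬(('d':Char) = 'a')), (by decide : ¬(('d':Char) = 'b')),
        (by decide : ¬(('d':Char) = 'c')), if_true, eq_self_iff_true, true_and, if_false,
        false_and, add_zero, zero_add, hJ0]
      rw [grd_in _ F 0 (K:Int) 0 (by omega) (by omega) (by omega) (by omega),
          grd_in _ F 0 (K:Int) 1 (by omega) (by omega) (by omega) (by omega),
          grd_in _ F 0 (K:Int) 2 (by omega) (by omega) (by omega) (by omega),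
          grd_in _ F 0 (K:Int) 3 (by omega) (by omega) (by omega) (by omega)]
      by_cases hK0 : (K:Int) = 0
      · simp only [hK0, if_pos (rfl : (0:Int) = 0), if_neg (by omega : ¬(1:Int) ≤ 0),
          if_neg (by omega : ¬(2:Int) ≤ 0 + 1), if_true]
        ring
      · simp only [if_neg hK0, if_pos (show (1:Int) ≤ (K:Int) by omega),
          if_pos (show (2:Int) ≤ (K:Int)+1 by omega)]
        ring
    have eR : ∀ K ∈ Finset.range (m+1),
        (F (J:Int) (K:Int) 0 * ((fun j k t => fB v j k t + takeB 'd' v j k t) (J:Int) (K:Int) 0)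
         + F (J:Int) (K:Int) 1 * ((fun j k t => fB v j k t + takeB 'd' v j k t) (J:Int) (K:Int) 1)
         + F (J:Int) (K:Int) 2 * ((fun j k t => fB v j k t + takeB 'd' v j k t) (J:Int) (K:Int) 2)
         + F (J:Int) (K:Int) 3 * ((fun j k t => fB v j k t + takeB 'd' v j k t) (J:Int) (K:Int) 3))
        = ((F (J:Int) (K:Int) 0 * fB v (J:Int) (K:Int) 0 + F (J:Int) (K:Int) 1 * fB v (J:Int) (K:Int) 1
            + F (J:Int) (K:Int) 2 * fB v (J:Int) (K:Int) 2 + F (J:Int) (K:Int) 3 * fB v (J:Int) (K:Int) 3)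
           + (if (K:Int) = 1 then 0 else F 0 (K:Int) 3 * fB v 0 ((K:Int)-1) 3)
           + (if (K:Int) = 1 then F 0 (K:Int) 3 * fB v 0 0 0 else 0)) := by
      intro K hK
      simp only [takeB_0, takeB_1, takeB_2, takeB_3,
        (by decide : ¬(('d':Char) = 'a')), (by decide : ¬(('d':Char) = 'b')),
        (by decide : ¬(('d':Char) = 'c')), if_true, eq_self_iff_true, true_and, if_false,
        false_and, add_zero, hJ0]
      by_cases h1 : (K:Int) = 1
      · simp only [if_pos h1]
        ring
      · simp only [if_neg h1]
        ring
    rw [Finset.sum_congr rfl eL, Finset.sum_congr rfl eR]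
    refine sum_add_congr2 _ _ _ _ _ _ ?_ ?_
    · -- K = 0 completion of a block vs the k = 1 take
      rw [sum_cast_ind m (fun x => grd (m:Int) F 0 1 3 * fB v 0 0 0) 0]
      rw [sum_cast_ind m (fun x => F 0 x 3 * fB v 0 0 0) 1]
      rw [if_pos ⟨le_refl 0, by positivity⟩]
      by_cases hm1 : (1:Int) ≤ (m:Int)
      · rw [if_pos ⟨by omega, hm1⟩,
            grd_in _ F 0 1 3 (by omega) (by omega) (by omega) (by omega)]
      · rw [if_neg (by omega), grd_kbig _ F _ _ _ (by omega)]
        ring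
    · -- the k ≥ 2 chain, shifted
      rw [show (fun K : Nat => (if 2 ≤ (K:Int)+1 then grd (m:Int) F 0 ((K:Int)+1) 3 else 0)
              * fB v 0 (K:Int) 3)
            = (fun K : Nat => (fun x => if 2 ≤ x then grd (m:Int) F 0 x 3 else 0) ((K:Int)+1)
              * (fun x => fB v 0 x 3) (K:Int)) from rfl]
      rw [shift_pair_up m
            (fun x => if 2 ≤ x then grd (m:Int) F 0 x 3 else 0)
            (fun x => fB v 0 x 3)
            (by show (if 2 ≤ (m:Int)+1 then grd (m:Int) F 0 ((m:Int)+1) 3 else 0)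
                  * fB v 0 (m:Int) 3 = 0
                rw [grd_kbig _ F _ _ _ (by omega)]
                simp)
            (by show (if (2:Int) ≤ 0 then grd (m:Int) F 0 0 3 else 0) * fB v 0 (-1) 3 = 0
                rw [if_neg (by omega)]
                ring)]
      refine Finset.sum_congr rfl (fun K hK => ?_)
      have hK' := Finset.mem_range.mp hK
      show (if 2 ≤ (K:Int) then grd (m:Int) F 0 (K:Int) 3 else 0) * fB v 0 ((K:Int)-1) 3 = _
      by_cases h2 : 2 ≤ (K:Int)
      · rw [if_pos h2, if_neg (by omega),
            grd_in _ F 0 (K:Int) 3 (by omega) (by omega) (by omega) (by omega)]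
      · rw [if_neg h2]
        by_cases h1 : (K:Int) = 1
        · rw [if_pos h1]
          ring
        · rw [if_neg h1]
          rw [fB_z3neg v 0 ((K:Int)-1) (by omega)]
          ring
  · -- rows J ≥ 1: no transition on 'd' touches them
    refine Finset.sum_congr rfl (fun K hK => ?_)
    have hK' := Finset.mem_range.mp hK
    simp only [pullRaw_0, pullRaw_1, pullRaw_2, pullRaw_3, takeB_0, takeB_1, takeB_2, takeB_3,
      (by decide : ¬(('d':Char) = 'a')), (by decide : ¬(('d':Char) = 'b')),
      (by decide : ¬(('d':Char) = 'c')), if_true, eq_self_iff_true, true_and, if_false,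
      false_and, add_zero, zero_add]
    rw [grd_in _ F (J:Int) (K:Int) 0 (by omega) (by omega) (by omega) (by omega),
        grd_in _ F (J:Int) (K:Int) 1 (by omega) (by omega) (by omega) (by omega),
        grd_in _ F (J:Int) (K:Int) 2 (by omega) (by omega) (by omega) (by omega),
        grd_in _ F (J:Int) (K:Int) 3 (by omega) (by omega) (by omega) (by omega)]
    rw [if_neg (show ¬((J:Int) = 0 ∧ (K:Int) = 0) by rintro ⟨h, -⟩; exact hJ0 h),
        if_neg (show ¬((J:Int) = 0 ∧ 1 ≤ (K:Int)) by rintro ⟨h, -⟩; exact hJ0 h)]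
    rw [hF3 (J:Int) (K:Int) (by omega)]
    ring

theorem case_other (m : Nat) (c : Char) (F : Int → Int → Int → Int) (v : List Char)
    (hca : ¬ c = 'a') (hcb : ¬ c = 'b') (hcc : ¬ c = 'c') (hcd : ¬ c = 'd') :
    GS m (pullRaw (m:Int) c F) (fun j k t => fB v j k t)
      = GS m F (fun j k t => fB v j k t + takeB c v j k t) := by
  unfold GS
  refine Finset.sum_congr rfl (fun J hJ => Finset.sum_congr rfl (fun K hK => ?_))
  have hJ' := Finset.mem_range.mp hJ
  have hK' := Finset.mem_range.mp hK
  simp only [pullRaw_0, pullRaw_1, pullRaw_2, pullRaw_3, takeB_0, takeB_1, takeB_2, takeB_3,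
    hca, hcb, hcc, hcd, if_false, false_and, add_zero, zero_add]
  rw [grd_in _ F (J:Int) (K:Int) 0 (by omega) (by omega) (by omega) (by omega),
      grd_in _ F (J:Int) (K:Int) 1 (by omega) (by omega) (by omega) (by omega),
      grd_in _ F (J:Int) (K:Int) 2 (by omega) (by omega) (by omega) (by omega),
      grd_in _ F (J:Int) (K:Int) 3 (by omega) (by omega) (by omega) (by omega)]

theorem raw_exchange (m : Nat) (c : Char) (F : Int → Int → Int → Int) (v : List Char)
    (hF3 : ∀ j k : Int, 1 ≤ j → F j k 3 = 0)
    (hb0 : ∀ k : Int, 0 ≤ k → k ≤ (m:Int) → F (m:Int) k 0 * fB v ((m:Int)+1) k 0 = 0)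
    (hb1 : ∀ j : Int, 0 ≤ j → j ≤ (m:Int) →
      F j (m:Int) 0 * fB v j ((m:Int)+1) 1 = 0 ∧ F j (m:Int) 1 * fB v j ((m:Int)+1) 1 = 0) :
    GS m (pullRaw (m:Int) c F) (fun j k t => fB v j k t)
      = GS m F (fun j k t => fB v j k t + takeB c v j k t) := by
  by_cases hca : c = 'a'
  · subst hca; exact case_a m F v hb0
  · by_cases hcb : c = 'b'
    · subst hcb; exact case_b m F v hb1
    · by_cases hcc : c = 'c'
      · subst hcc; exact case_c m F v
      · by_cases hcd : c = 'd'
        · subst hcd; exact case_d m F v hF3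
        · exact case_other m c F v hca hcb hcc hcd

-- assembled exchange up to mod M1
theorem GS_exchange (m : Nat) (c : Char) (F : Int → Int → Int → Int) (v : List Char)
    (hF3 : ∀ j k : Int, 1 ≤ j → F j k 3 = 0)
    (hb0 : ∀ k : Int, 0 ≤ k → k ≤ (m:Int) → F (m:Int) k 0 * fB v ((m:Int)+1) k 0 = 0)
    (hb1 : ∀ j : Int, 0 ≤ j → j ≤ (m:Int) →
      F j (m:Int) 0 * fB v j ((m:Int)+1) 1 = 0 ∧ F j (m:Int) 1 * fB v j ((m:Int)+1) 1 = 0) :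
    GS m (pull (m:Int) c F) (fun j k t => fB v j k t)
      ≡ GS m F (fun j k t => fB (c :: v) j k t) [ZMOD M1] := by
  have h1 : GS m (pull (m:Int) c F) (fun j k t => fB v j k t)
      ≡ GS m (pullRaw (m:Int) c F) (fun j k t => fB v j k t) [ZMOD M1] := by
    unfold GS
    refine sum_modEq _ _ _ (fun J _ => sum_modEq _ _ _ (fun K _ => ?_))
    exact Int.ModEq.add (Int.ModEq.add (Int.ModEq.add
      ((pull_modEq _ c F _ _ 0).mul_right _) ((pull_modEq _ c F _ _ 1).mul_right _))
      ((pull_modEq _ c F _ _ 2).mul_right _)) ((pull_modEq _ c F _ _ 3).mul_right _)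
  have h2 : GS m F (fun j k t => fB v j k t + takeB c v j k t)
      ≡ GS m F (fun j k t => fB (c :: v) j k t) [ZMOD M1] := by
    unfold GS
    refine sum_modEq _ _ _ (fun J _ => sum_modEq _ _ _ (fun K _ => ?_))
    exact Int.ModEq.add (Int.ModEq.add (Int.ModEq.add
      ((fB_cons_modEq c v _ _ 0).symm.mul_left _) ((fB_cons_modEq c v _ _ 1).symm.mul_left _))
      ((fB_cons_modEq c v _ _ 2).symm.mul_left _)) ((fB_cons_modEq c v _ _ 3).symm.mul_left _)
  exact (h1.trans (by rw [raw_exchange m c F v hF3 hb0 hb1])).trans h2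

-- the bilinear invariant over all splits of the string
theorem invariant (n m : Nat) (hm : n ≤ 2*m+1) :
    ∀ (v u : List Char), u.length + v.length = n →
    GS m (layer (m:Int) u) (fun j k t => fB v j k t)
      ≡ GS m (layer (m:Int) (u ++ v)) (fun j k t => fB [] j k t) [ZMOD M1] := by
  intro v
  induction v with
  | nil => intro u hu; rw [List.append_nil]
  | cons c v ih =>
      intro u hu
      have hstep : layer (m:Int) (u ++ [c]) = pull (m:Int) c (layer (m:Int) u) := by
        unfold layer; rw [List.foldl_append, List.foldl_cons, List.foldl_nil]
      have hb0 : ∀ k : Int, 0 ≤ k → k ≤ (m:Int) →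
          layer (m:Int) u (m:Int) k 0 * fB v ((m:Int)+1) k 0 = 0 := by
        intro k h1 h2
        by_cases hs : (m:Int) + k > (u.length : Int)
        · rw [(layer_supp (m:Int) u (m:Int) k hs).1, zero_mul]
        · rw [fB_cost_zero v ((m:Int)+1) k 0 (by
            unfold costB
            rw [if_pos rfl, if_neg (by rintro ⟨h, -⟩; omega)]
            have : (v.length : Int) = (n:Int) - (u.length : Int) - 1 := by
              simp only [List.length_cons] at hu; push_cast; omega
            omega), mul_zero]
      have hb1 : ∀ j : Int, 0 ≤ j → j ≤ (m:Int) →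
          layer (m:Int) u j (m:Int) 0 * fB v j ((m:Int)+1) 1 = 0 ∧
          layer (m:Int) u j (m:Int) 1 * fB v j ((m:Int)+1) 1 = 0 := by
        intro j h1 h2
        by_cases hs : j + (m:Int) > (u.length : Int)
        · rw [(layer_supp (m:Int) u j (m:Int) hs).1, (layer_supp (m:Int) u j (m:Int) hs).2]
          simp
        · have hz : fB v j ((m:Int)+1) 1 = 0 := by
            apply fB_cost_zero
            unfold costB
            rw [if_neg (by omega), if_pos rfl]
            have : (v.length : Int) = (n:Int) - (u.length : Int) - 1 := by
              simp only [List.length_cons] at hu; push_cast; omega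
            omega
          rw [hz]; simp
      have hx := GS_exchange m c (layer (m:Int) u) v
        (fun j k hj => layer_z3 (m:Int) u j k hj) hb0 hb1
      rw [← hstep] at hx
      have hulen : (u ++ [c]).length + v.length = n := by
        simp only [List.length_append, List.length_cons, List.length_nil] at hu ⊢
        omega
      have ihx := ih (u ++ [c]) hulen
      rw [List.append_assoc] at ihx
      exact hx.symm.trans ihx

-- collapsing GS at the indicator ends
theorem GS_f0 (m : Nat) (g : Int → Int → Int → Int) : GS m f0 g = g 0 0 0 := by
  unfold GS f0
  have hinner : ∀ J ∈ Finset.range (m+1),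
      (∑ K ∈ Finset.range (m+1),
        ((if (J:Int) = 0 ∧ (K:Int) = 0 ∧ (0:Int) = 0 then (1:Int) else 0) * g (J:Int) (K:Int) 0
         + (if (J:Int) = 0 ∧ (K:Int) = 0 ∧ (1:Int) = 0 then (1:Int) else 0) * g (J:Int) (K:Int) 1
         + (if (J:Int) = 0 ∧ (K:Int) = 0 ∧ (2:Int) = 0 then (1:Int) else 0) * g (J:Int) (K:Int) 2
         + (if (J:Int) = 0 ∧ (K:Int) = 0 ∧ (3:Int) = 0 then (1:Int) else 0) * g (J:Int) (K:Int) 3))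
      = (if (J:Int) = 0 then g (J:Int) 0 0 else 0) := by
    intro J hJ
    have e : ∀ K ∈ Finset.range (m+1),
        ((if (J:Int) = 0 ∧ (K:Int) = 0 ∧ (0:Int) = 0 then (1:Int) else 0) * g (J:Int) (K:Int) 0
         + (if (J:Int) = 0 ∧ (K:Int) = 0 ∧ (1:Int) = 0 then (1:Int) else 0) * g (J:Int) (K:Int) 1
         + (if (J:Int) = 0 ∧ (K:Int) = 0 ∧ (2:Int) = 0 then (1:Int) else 0) * g (J:Int) (K:Int) 2
         + (if (J:Int) = 0 ∧ (K:Int) = 0 ∧ (3:Int) = 0 then (1:Int) else 0) * g (J:Int) (K:Int) 3)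
        = (if (K:Int) = 0 then (if (J:Int) = 0 then g (J:Int) (K:Int) 0 else 0) else 0) := by
      intro K hK
      split_ifs <;> simp_all <;> omega
    rw [Finset.sum_congr rfl e, sum_cast_ind m (fun x => if (J:Int) = 0 then g (J:Int) x 0 else 0) 0]
    rw [if_pos ⟨le_refl 0, by positivity⟩]
  rw [Finset.sum_congr rfl hinner,
      sum_cast_ind m (fun x => g x 0 0) 0]
  rw [if_pos ⟨le_refl 0, by positivity⟩]

theorem GS_fin (m : Nat) (F : Int → Int → Int → Int) :
    GS m F (fun j k t => fB [] j k t) = F 0 0 0 := by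
  unfold GS
  have hinner : ∀ J ∈ Finset.range (m+1),
      (∑ K ∈ Finset.range (m+1),
        (F (J:Int) (K:Int) 0 * fB [] (J:Int) (K:Int) 0 + F (J:Int) (K:Int) 1 * fB [] (J:Int) (K:Int) 1
         + F (J:Int) (K:Int) 2 * fB [] (J:Int) (K:Int) 2 + F (J:Int) (K:Int) 3 * fB [] (J:Int) (K:Int) 3))
      = (if (J:Int) = 0 then F (J:Int) 0 0 else 0) := by
    intro J hJ
    have e : ∀ K ∈ Finset.range (m+1),
        (F (J:Int) (K:Int) 0 * fB [] (J:Int) (K:Int) 0 + F (J:Int) (K:Int) 1 * fB [] (J:Int) (K:Int) 1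
         + F (J:Int) (K:Int) 2 * fB [] (J:Int) (K:Int) 2 + F (J:Int) (K:Int) 3 * fB [] (J:Int) (K:Int) 3)
        = (if (K:Int) = 0 then (if (J:Int) = 0 then F (J:Int) (K:Int) 0 else 0) else 0) := by
      intro K hK
      simp only [fB]
      split_ifs <;> simp_all <;> omega
    rw [Finset.sum_congr rfl e, sum_cast_ind m (fun x => if (J:Int) = 0 then F (J:Int) x 0 else 0) 0]
    rw [if_pos ⟨le_refl 0, by positivity⟩]
  rw [Finset.sum_congr rfl hinner, sum_cast_ind m (fun x => F x 0 0) 0]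
  rw [if_pos ⟨le_refl 0, by positivity⟩]

-- main identity: forward layer at the accepting state = backward count at the start state
theorem layer_eq_fB (n m : Nat) (hm : n ≤ 2*m+1) (s : List Char) (hs : s.length = n) :
    layer (m:Int) s 0 0 0 = fB s 0 0 0 := by
  have hinv := invariant n m hm s [] (by simp [hs])
  rw [show ([] : List Char) ++ s = s from rfl] at hinv
  rw [show layer (m:Int) [] = f0 from rfl] at hinv
  rw [GS_f0 m (fun j k t => fB s j k t)] at hinv
  rw [GS_fin m (layer (m:Int) s)] at hinv
  have h1 : fB s 0 0 0 % M1 = fB s 0 0 0 :=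
    Int.emod_eq_of_lt (fB_nonneg s 0 0 0) (fB_lt s 0 0 0)
  have h2 : layer (m:Int) s 0 0 0 % M1 = layer (m:Int) s 0 0 0 :=
    Int.emod_eq_of_lt (layer_nonneg (m:Int) s 0 0 0) (layer_lt (m:Int) s 0 0 0)
  have := hinv.symm
  unfold Int.ModEq at this
  omega

-- ===== VERDICT (by name: the statement is the Claim_ definition above) =====
theorem solve_spec : Claim_equal_solve := by
  unfold Claim_equal_solve
  intro s _
  unfold Spec_solve
  show solve s = solve_alt s
  have hlen : PySem.Str.len s = ((s.toList.length : Nat) : Int) := PySem.Str.len_eq s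
  have hfd : PySem.Int.floordiv ((s.toList.length : Nat) : Int) 2
      = ((s.toList.length / 2 : Nat) : Int) := by
    exact_mod_cast PySem.Int.floordiv_natCast s.toList.length 2
  simp only [solve, solve_alt]
  rw [hlen, hfd]
  have hA := (A_layers s s.toList.length (s.toList.length / 2) rfl s.toList.length le_rfl).2.1
    0 0 0 (by omega) (by omega) (by omega) (by omega) (by omega) (by omega)
  rw [List.take_length] at hA
  rw [hA]
  rw [layer_eq_fB s.toList.length (s.toList.length / 2) (by omega) s.toList rfl]
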